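-- pv_equiv track=rewrite | github.com/raeul0304/upstageCodingTest | programmers/level3/모두 0으로 만들기/[프로그래머스] 모두 0으로 만들기.py | solution
-- ===== SOURCE A (Python) =====
-- from collections import defaultdict, deque
--
-- def solution(a, edges):
--     n = len(a)
--     # 1. 전체 가중치 합계가 0이 아닌 경우 -1 반환
--     if sum(a) != 0:
--         return -1
--
--     # 2. 트리 그래프 생성
--     graph = defaultdict(list)
--     for u, v in edges:
--         graph[u].append(v)
--         graph[v].append(u)
--
--     # 3. BFS를 통해 가중치 조정 횟수 계산
--     def bfs(start):
--         total_moves = 0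
--         visited = [False] * n
--         queue = deque([start])
--         visited[start] = True
--         parents = [-1] * n
--         order = []
--
--         while queue:
--             node = queue.popleft()
--             order.append(node)
--             for neighbor in graph[node]:
--                 if not visited[neighbor]:
--                     visited[neighbor] = True
--                     parents[neighbor] = node
--                     queue.append(neighbor)
--
--         # 가중치 조정: 자식에서 부모로 전파
--         for node in reversed(order):
--             parent = parents[node]
--             if parent != -1:
--                 a[parent] += a[node]
--                 total_moves += abs(a[node])
--
--         return total_moves
--
--     total_moves = bfs(0)  # 시작 노드를 0으로 설정
--
--     return total_moves
-- ===== SOURCE B (Python) =====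
-- def solution(a, edges):
--     # Order-independent leaf pruning via degree + neighbor-sum arrays; no BFS/DFS,
--     # no adjacency lists. Mutates a in place to the same final array as A on trees.
--     if sum(a) != 0:
--         return -1
--     n = len(a)
--     deg = [0] * n
--     nsum = [0] * n
--     for u, v in edges:
--         deg[u] += 1
--         deg[v] += 1
--         nsum[u] += v
--         nsum[v] += u
--     queue = [v for v in range(1, n) if deg[v] == 1]
--     total = 0
--     for leaf in queue:  # queue grows as parents themselves become leaves
--         parent = nsum[leaf]
--         a[parent] += a[leaf]
--         total += abs(a[leaf])
--         deg[parent] -= 1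
--         nsum[parent] -= leaf
--         if deg[parent] == 1 and parent != 0:
--             queue.append(parent)
--     return total
-- ===== Notes on version B (the rewrite author's own statement) =====
-- stated objective: alternative
-- what changed: Replaces BFS-order-then-reversed-pass accumulation over an adjacency dict with an order-independent leaf-pruning loop over degree and neighbor-sum arrays (each pruned leaf folds its accumulated weight into its unique remaining neighbour), with no graph adjacency structure and no traversal order at all.
-- outside the precondition, e.g. on solution([0, 0, 1, -1], [[0, 1], [1, 2], [2, 3], [3, 0]]): A returns 3, B returns 0
import Mathlib
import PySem

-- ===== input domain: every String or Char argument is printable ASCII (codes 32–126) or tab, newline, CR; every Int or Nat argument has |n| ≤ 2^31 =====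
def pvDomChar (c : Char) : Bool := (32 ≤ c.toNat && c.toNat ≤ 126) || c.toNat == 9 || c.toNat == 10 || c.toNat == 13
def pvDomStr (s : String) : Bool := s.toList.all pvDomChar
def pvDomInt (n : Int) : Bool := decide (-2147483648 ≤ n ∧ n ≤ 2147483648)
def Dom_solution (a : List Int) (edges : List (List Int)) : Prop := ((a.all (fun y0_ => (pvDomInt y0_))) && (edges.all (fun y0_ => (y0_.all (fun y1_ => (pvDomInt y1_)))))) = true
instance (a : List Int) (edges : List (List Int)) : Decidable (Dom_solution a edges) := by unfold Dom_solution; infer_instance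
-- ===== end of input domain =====

-- B replaces A's BFS-order + reversed accumulation pass by an order-independent leaf-pruning
-- loop over degree/neighbour-sum arrays (alternative decomposition; equal return value on tree
-- inputs; both Pythons also mutate `a` in place to the same final array — only the return value
-- is the subject of the theorems below).

-- ===== PORT A =====
-- defaultdict(list) built by appending both endpoints of every edge
def pvGraphA (edges : List (List Int)) : PySem.Dict Int (List Int) :=
  edges.foldl (fun g e =>
    match e with
    | [u, v] => (g.modify u [] (· ++ [v])).modify v [] (· ++ [u])
    | _ => g  -- Python raises ValueError here (tuple unpacking); outside Pre_
    ) PySem.Dict.empty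

-- the while-queue BFS; fuel only makes the recursion total (n+1 pops suffice, proven below).
-- visited[neighbor] is read with default `true` (an out-of-range read only happens outside Pre_).
def pvBfsLoop (g : PySem.Dict Int (List Int)) :
    Nat → List Bool → List Int → List Int → List Int → List Int × List Int
  | 0, _, _, parents, order => (parents, order)
  | fuel+1, visited, queue, parents, order =>
    match queue with
    | [] => (parents, order)
    | node :: qs =>
      let st := (g.getD node []).foldl
        (fun (st : List Bool × List Int × List Int) nb =>
          if PySem.List.pyGetD st.1 nb true = false then
            (PySem.List.pySetD st.1 nb true, PySem.List.pySetD st.2.1 nb node, st.2.2 ++ [nb])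
          else st)
        (visited, parents, qs)
      pvBfsLoop g fuel st.1 st.2.2 st.2.1 (order ++ [node])

def solution (a : List Int) (edges : List (List Int)) : Int :=
  let n := a.length
  if a.sum ≠ 0 then -1
  else
    let graph := pvGraphA edges
    let pr := pvBfsLoop graph (n+1) (PySem.List.pySetD (List.replicate n false) 0 true)
                [0] (List.replicate n (-1)) []
    let st := pr.2.reverse.foldl
      (fun (st : List Int × Int) node =>
        let parent := PySem.List.pyGetD pr.1 node (-1)
        if parent ≠ -1 then
          let aArr := PySem.List.pySetD st.1 parent
            (PySem.List.pyGetD st.1 parent 0 + PySem.List.pyGetD st.1 node 0)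
          (aArr, st.2 + |PySem.List.pyGetD aArr node 0|)
        else st)
      (a, 0)
    st.2

-- ===== PORT B =====
-- leaf-pruning worklist; fuel only makes the recursion total (n+1 iterations suffice, proven below)
def pvPrune : Nat → List Int → List Int → List Int → Int → List Int → Int
  | 0, _, _, _, total, _ => total
  | fuel+1, deg, ns, aArr, total, pending =>
    match pending with
    | [] => total
    | leaf :: rest =>
      let parent := PySem.List.pyGetD ns leaf 0
      let aArr := PySem.List.pySetD aArr parent
        (PySem.List.pyGetD aArr parent 0 + PySem.List.pyGetD aArr leaf 0)
      let total := total + |PySem.List.pyGetD aArr leaf 0|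
      let deg := PySem.List.pySetD deg parent (PySem.List.pyGetD deg parent 0 - 1)
      let ns := PySem.List.pySetD ns parent (PySem.List.pyGetD ns parent 0 - leaf)
      let pending := if PySem.List.pyGetD deg parent 0 == 1 && parent != 0
                     then rest ++ [parent] else rest
      pvPrune fuel deg ns aArr total pending

def solution_alt (a : List Int) (edges : List (List Int)) : Int :=
  if a.sum ≠ 0 then -1
  else
    let n := a.length
    let st0 := edges.foldl
      (fun (st : List Int × List Int) e =>
        match e with
        | [u, v] =>
          let deg := PySem.List.pySetD st.1 u (PySem.List.pyGetD st.1 u 0 + 1)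
          let deg := PySem.List.pySetD deg v (PySem.List.pyGetD deg v 0 + 1)
          let ns := PySem.List.pySetD st.2 u (PySem.List.pyGetD st.2 u 0 + v)
          let ns := PySem.List.pySetD ns v (PySem.List.pyGetD ns v 0 + u)
          (deg, ns)
        | _ => st  -- Python raises ValueError here (tuple unpacking); outside Pre_
        )
      (List.replicate n (0:Int), List.replicate n (0:Int))
    let queue := (PySem.List.pyRange 1 (n:Int) 1).filter
      (fun v => PySem.List.pyGetD st0.1 v 0 == 1)
    pvPrune (n+1) st0.1 st0.2 a 0 queue

-- ===== PRECONDITION & SPEC =====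
def pvEdgeOK (n : Int) : List Int → Bool
  | [u, v] => decide (0 ≤ u) && decide (u < n) && decide (0 ≤ v) && decide (v < n) && decide (u ≠ v)
  | _ => false

def pvNorm (e : List Int) : Int × Int :=
  (min (e.headD 0) ((e.drop 1).headD 0), max (e.headD 0) ((e.drop 1).headD 0))

def pvGrow (edges : List (List Int)) (s : List Int) : List Int :=
  edges.foldl (fun s e =>
    match e with
    | [u, v] =>
      if u ∈ s ∧ v ∉ s then s ++ [v]
      else if v ∈ s ∧ u ∉ s then s ++ [u]
      else s
    | _ => s) s

-- Pre_ admits every input whose weights do not sum to 0 (A answers -1 before looking at edges),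
-- and otherwise requires the edges to form a simple tree on the nodes 0..len(a)-1.  Excluded are
-- the sum-zero inputs whose edge list is not such a tree (wrong arity, out-of-range endpoint,
-- self-loop, duplicate edge, cycle or disconnection): there A either raises or returns a value
-- that depends on the accidental BFS spanning structure, and B's pruning order defensibly differs.
def Pre_solution (a : List Int) (edges : List (List Int)) : Prop :=
  a.sum ≠ 0 ∨
  (a ≠ [] ∧ (∀ e ∈ edges, pvEdgeOK (a.length : Int) e = true) ∧ (edges.map pvNorm).Nodup ∧
   edges.length + 1 = a.length ∧ ((pvGrow edges)^[a.length] [(0:Int)]).length = a.length)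

instance (a : List Int) (edges : List (List Int)) : Decidable (Pre_solution a edges) := by
  unfold Pre_solution; infer_instance

def pvWitness_solution : List Int × List (List Int) := ([1, -1], [[0, 1]])

def Spec_solution (a : List Int) (edges : List (List Int)) (out : Int) : Prop := out = solution_alt a edges
instance (a : List Int) (edges : List (List Int)) (out : Int) : Decidable (Spec_solution a edges out) := by unfold Spec_solution; infer_instance

-- ===== CLAIM (what is proved, stated in full; the proofs are below) =====
def Claim_equal_solution : Prop := ∀ (a : List Int) (edges : List (List Int)), Dom_solution a edges → Pre_solution a edges → Spec_solution a edges (solution a edges)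

-- ===== LEMMAS AND PROOFS =====

-- == shared notions: adjacency, parent lookup, children, subtree sums, order positions ==

def pvAdj (edges : List (List Int)) (u v : Int) : Prop := [u, v] ∈ edges ∨ [v, u] ∈ edges

def pvPar (parents : List Int) (v : Int) : Int := PySem.List.pyGetD parents v (-1)

def pvChl (parents ord : List Int) (x : Int) : List Int :=
  ord.filter (fun u => decide (u ≠ 0) && (pvPar parents u == x))

def pvSf (a0 parents ord : List Int) : Nat → Int → Int
  | 0, v => PySem.List.pyGetD a0 v 0
  | f+1, v => PySem.List.pyGetD a0 v 0 + ((pvChl parents ord v).map (pvSf a0 parents ord f)).sum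

def pvS (a0 parents ord : List Int) (v : Int) : Int := pvSf a0 parents ord ord.length v

def pvBefore (L : List Int) (u v : Int) : Prop :=
  ∃ i j : Nat, i < j ∧ L[i]? = some u ∧ L[j]? = some v

-- an order/parents pair as produced by a run of A's BFS on a valid tree
structure pvGood (n : Nat) (edges : List (List Int)) (parents ord : List Int) : Prop where
  nodup : ord.Nodup
  mem : ∀ v : Int, v ∈ ord ↔ 0 ≤ v ∧ v < n
  head : ord.head? = some 0
  root : pvPar parents 0 = -1
  par : ∀ v ∈ ord, v ≠ 0 → pvAdj edges (pvPar parents v) v ∧ pvBefore ord (pvPar parents v) v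

-- == generic small helpers ==

theorem pv_getD_setD {α : Type} (l : List α) (i j : Int) (x : α) (d : α)
    (hi : 0 ≤ i) (_hi2 : i < l.length) (hj : 0 ≤ j) (hj2 : j < l.length) :
    PySem.List.pyGetD (PySem.List.pySetD l i x) j d = if j = i then x else PySem.List.pyGetD l j d := by
  rw [PySem.List.pySetD_of_nonneg _ x hi,
    PySem.List.pyGetD_eq_getElem _ d hj (by simpa using hj2),
    List.getElem_set]
  rw [PySem.List.pyGetD_eq_getElem _ d hj hj2]
  split_ifs with h1 h2 h2 <;> first | rfl | (exfalso; omega)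


theorem pv_adj_bounds (n : Int) (edges : List (List Int))
    (hE : ∀ e ∈ edges, pvEdgeOK n e = true) (u v : Int) (h : pvAdj edges u v) :
    0 ≤ u ∧ u < n ∧ 0 ≤ v ∧ v < n ∧ u ≠ v := by
  rcases h with h | h <;> have := hE _ h <;> simp [pvEdgeOK] at this <;> tauto



theorem pv_before_append (L L' : List Int) (u v : Int) (h : pvBefore L u v) :
    pvBefore (L ++ L') u v := by
  obtain ⟨i, j, hij, hi, hj⟩ := h
  exact ⟨i, j, hij, by rw [List.getElem?_append_left (by exact (List.getElem?_eq_some_iff.1 hi).1)]; exact hi,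
    by rw [List.getElem?_append_left (by exact (List.getElem?_eq_some_iff.1 hj).1)]; exact hj⟩


theorem pv_before_mem (L : List Int) (u v : Int) (h : pvBefore L u v) : u ∈ L ∧ v ∈ L := by
  obtain ⟨i, j, hij, hi, hj⟩ := h
  exact ⟨List.mem_of_getElem? hi, List.mem_of_getElem? hj⟩


theorem pv_idx_unique (L : List Int) (h : L.Nodup) (i j : Nat) (v : Int)
    (hi : L[i]? = some v) (hj : L[j]? = some v) : i = j := by
  obtain ⟨hi1, hi2⟩ := List.getElem?_eq_some_iff.1 hi
  obtain ⟨hj1, hj2⟩ := List.getElem?_eq_some_iff.1 hj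
  exact (h.getElem_inj_iff (hi := hi1) (hj := hj1)).1 (by rw [hi2, hj2])


theorem pv_before_ne (L : List Int) (h : L.Nodup) (u v : Int) (hb : pvBefore L u v) : u ≠ v := by
  obtain ⟨i, j, hij, hi, hj⟩ := hb
  intro he; subst he
  exact absurd (pv_idx_unique L h i j u hi hj) (by omega)


theorem pv_before_asymm (L : List Int) (h : L.Nodup) (u v : Int)
    (h1 : pvBefore L u v) (h2 : pvBefore L v u) : False := by
  obtain ⟨i, j, hij, hi, hj⟩ := h1
  obtain ⟨i', j', hij', hi', hj'⟩ := h2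
  have := pv_idx_unique L h i j' u hi hj'
  have := pv_idx_unique L h j i' v hj hi'
  omega


theorem pv_minmax_eq (a b c d : Int) (h : (min a b, max a b) = (min c d, max c d)) :
    (a = c ∧ b = d) ∨ (a = d ∧ b = c) := by
  simp only [Prod.mk.injEq] at h
  rcases le_total a b with h1 | h1 <;> rcases le_total c d with h2 | h2 <;>
    simp [h1, h2] at h <;> omega


-- sum over a nodup list of an indicator picking out one element
theorem pv_sum_ite_mem (l : List Int) (h : l.Nodup) (j : Int) (f : Int → Int) :
    (l.map (fun v => if v = j then f v else 0)).sum = if j ∈ l then f j else 0 := by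
  induction l with
  | nil => simp
  | cons x t ih =>
    simp only [List.map_cons, List.sum_cons, List.nodup_cons] at *
    rcases h with ⟨hx, ht⟩
    rw [ih ht]
    by_cases hxj : x = j
    · subst hxj; simp [hx]
    · simp only [if_neg hxj]
      by_cases hjt : j ∈ t <;> simp [Ne.symm hxj, hjt]


theorem pv_sum_ite_filter (l : List Int) (p : Int → Prop) [DecidablePred p] (f : Int → Int) :
    (l.map (fun v => if p v then f v else 0)).sum
      = ((l.filter (fun v => decide (p v))).map f).sum := by
  induction l with
  | nil => simp
  | cons x t ih =>
    by_cases hx : p x <;> simp [hx, ih]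


-- == A side: the dict of neighbours holds exactly the adjacent nodes ==

theorem pv_graphA_mem_aux (es : List (List Int))
    (hE : ∀ e ∈ es, ∃ u v : Int, e = [u, v]) :
    ∀ (g : PySem.Dict Int (List Int)) (u x : Int),
    (x ∈ (es.foldl (fun g e =>
      match e with
      | [u, v] => (g.modify u [] (· ++ [v])).modify v [] (· ++ [u])
      | _ => g) g).getD u [] ↔ x ∈ g.getD u [] ∨ pvAdj es u x) := by
  induction es with
  | nil => intro g u x; simp [pvAdj]
  | cons e t ih =>
    intro g u x
    obtain ⟨p, q, rfl⟩ := hE e (by simp)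
    have ht : ∀ e ∈ t, ∃ u v : Int, e = [u, v] := fun e he => hE e (by simp [he])
    simp only [List.foldl_cons]
    rw [ih ht]
    have hg : ∀ w z : Int, w ∈ ((g.modify p [] (· ++ [q])).modify q [] (· ++ [p])).getD z []
        ↔ w ∈ g.getD z [] ∨ (z = p ∧ w = q) ∨ (z = q ∧ w = p) := by
      intro w z
      simp only [PySem.Dict.getD_modify]
      by_cases hzq : z = q <;> by_cases hzp : z = p <;> by_cases hpq : p = q <;>
        simp_all
    rw [hg]
    simp only [pvAdj, List.mem_cons, List.cons.injEq]
    tauto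

theorem pv_graphA_mem (edges : List (List Int))
    (hE : ∀ e ∈ edges, ∃ u v : Int, e = [u, v]) (u x : Int) :
    x ∈ (pvGraphA edges).getD u [] ↔ pvAdj edges u x := by
  have := pv_graphA_mem_aux edges hE PySem.Dict.empty u x
  simpa [pvGraphA, PySem.Dict.getD_empty] using this

-- == A side: BFS loop invariant and final properties ==

structure pvBCore (n : Nat) (edges : List (List Int)) (visited : List Bool)
    (queue parents order : List Int) : Prop where
  vlen : visited.length = n
  plen : parents.length = n
  nodup : (order ++ queue).Nodup
  rng : ∀ v ∈ order ++ queue, 0 ≤ v ∧ v < n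
  vis : ∀ j : Nat, j < n → (visited[j]? = some true ↔ (j : Int) ∈ order ++ queue)
  head : (order ++ queue).head? = some 0
  root : pvPar parents 0 = -1
  par : ∀ v ∈ order ++ queue, v ≠ 0 →
    pvAdj edges (pvPar parents v) v ∧ pvBefore (order ++ queue) (pvPar parents v) v

def pvBFinal (n : Nat) (edges : List (List Int)) (parents ord : List Int) : Prop :=
  ord.Nodup ∧ (∀ v ∈ ord, 0 ≤ v ∧ v < n) ∧ ord.head? = some 0 ∧ pvPar parents 0 = -1 ∧
  (∀ v ∈ ord, v ≠ 0 → pvAdj edges (pvPar parents v) v ∧ pvBefore ord (pvPar parents v) v) ∧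
  (∀ u ∈ ord, ∀ x, pvAdj edges u x → x ∈ ord)

theorem pv_len_le (n : Nat) (L : List Int) (hnd : L.Nodup)
    (hrng : ∀ v ∈ L, 0 ≤ v ∧ v < n) : L.length ≤ n := by
  have hsub : L.toFinset ⊆ Finset.Ico (0:Int) n := by
    intro x hx
    simp only [List.mem_toFinset] at hx
    have := hrng x hx
    simp only [Finset.mem_Ico]
    omega
  have := Finset.card_le_card hsub
  rw [List.toFinset_card_of_nodup hnd] at this
  simpa [Int.card_Ico] using this

theorem pv_bfs_inner (n : Nat) (edges : List (List Int))
    (hE : ∀ e ∈ edges, pvEdgeOK (n : Int) e = true) (node : Int) (order : List Int) :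
    ∀ nbrs : List Int, (∀ x ∈ nbrs, pvAdj edges node x) →
    ∀ visited parents queue, pvBCore n edges visited queue parents (order ++ [node]) →
      pvBCore n edges
        (nbrs.foldl
          (fun (st : List Bool × List Int × List Int) nb =>
            if PySem.List.pyGetD st.1 nb true = false then
              (PySem.List.pySetD st.1 nb true, PySem.List.pySetD st.2.1 nb node, st.2.2 ++ [nb])
            else st)
          (visited, parents, queue)).1
        (nbrs.foldl
          (fun (st : List Bool × List Int × List Int) nb =>
            if PySem.List.pyGetD st.1 nb true = false then
              (PySem.List.pySetD st.1 nb true, PySem.List.pySetD st.2.1 nb node, st.2.2 ++ [nb])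
            else st)
          (visited, parents, queue)).2.2
        (nbrs.foldl
          (fun (st : List Bool × List Int × List Int) nb =>
            if PySem.List.pyGetD st.1 nb true = false then
              (PySem.List.pySetD st.1 nb true, PySem.List.pySetD st.2.1 nb node, st.2.2 ++ [nb])
            else st)
          (visited, parents, queue)).2.1
        (order ++ [node]) ∧
      (∀ x ∈ nbrs, x ∈ (order ++ [node]) ++
        (nbrs.foldl
          (fun (st : List Bool × List Int × List Int) nb =>
            if PySem.List.pyGetD st.1 nb true = false then
              (PySem.List.pySetD st.1 nb true, PySem.List.pySetD st.2.1 nb node, st.2.2 ++ [nb])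
            else st)
          (visited, parents, queue)).2.2) ∧
      (∃ post, (nbrs.foldl
          (fun (st : List Bool × List Int × List Int) nb =>
            if PySem.List.pyGetD st.1 nb true = false then
              (PySem.List.pySetD st.1 nb true, PySem.List.pySetD st.2.1 nb node, st.2.2 ++ [nb])
            else st)
          (visited, parents, queue)).2.2 = queue ++ post) := by
  intro nbrs
  induction nbrs with
  | nil =>
    intro _ visited parents queue hinv
    exact ⟨hinv, by simp, ⟨[], by simp⟩⟩
  | cons nb t ih =>
    intro hadj visited parents queue hinv
    have hnbadj : pvAdj edges node nb := hadj nb (by simp)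
    obtain ⟨hn0, hnn, hb0, hbn, hne⟩ := pv_adj_bounds n edges hE node nb hnbadj
    simp only [List.foldl_cons]
    by_cases hc : PySem.List.pyGetD visited nb true = false
    · rw [if_pos hc]
      -- nb is newly discovered
      have hvlen := hinv.vlen
      have hplen := hinv.plen
      have hgetv : PySem.List.pyGetD visited nb true = visited[nb.toNat] :=
        PySem.List.pyGetD_eq_getElem visited true hb0 (by rw [hvlen]; exact_mod_cast hbn)
      have hnbnat : nb.toNat < n := by omega
      have hnbvisF : visited[nb.toNat] = false := by rw [← hgetv]; exact hc
      have hnbnotin : nb ∉ order ++ [node] ++ queue := by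
        intro hmem
        have h1 := (hinv.vis nb.toNat hnbnat).2 (by rw [Int.toNat_of_nonneg hb0]; exact hmem)
        rw [List.getElem?_eq_getElem (by rw [hvlen]; exact hnbnat)] at h1
        rw [hnbvisF] at h1
        exact Bool.false_ne_true (Option.some.inj h1)
      have h0mem : (0 : Int) ∈ order ++ [node] ++ queue := List.mem_of_mem_head? (by
        rw [hinv.head]; rfl)
      have hn1 : 0 < n := by have := hinv.rng 0 h0mem; omega
      have hnb0 : nb ≠ 0 := fun h => hnbnotin (h ▸ h0mem)
      have hassoc : (order ++ [node]) ++ (queue ++ [nb])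
          = (order ++ [node] ++ queue) ++ [nb] := by simp
      have hcore' : pvBCore n edges (PySem.List.pySetD visited nb true) (queue ++ [nb])
          (PySem.List.pySetD parents nb node) (order ++ [node]) := by
        constructor
        · rw [PySem.List.length_pySetD]; exact hvlen
        · rw [PySem.List.length_pySetD]; exact hplen
        · rw [hassoc, List.nodup_append]
          refine ⟨hinv.nodup, by simp, ?_⟩
          intro a ha b hb
          simp only [List.mem_singleton] at hb
          subst hb
          exact fun h => hnbnotin (h ▸ ha)
        · rw [hassoc]
          intro v hv
          rcases List.mem_append.1 hv with h | h
          · exact hinv.rng v h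
          · simp only [List.mem_singleton] at h
            subst h
            exact ⟨hb0, hbn⟩
        · intro j hj
          rw [hassoc, PySem.List.pySetD_of_nonneg visited true hb0]
          by_cases hjn : j = nb.toNat
          · subst hjn
            rw [List.getElem?_set_self (by rw [hvlen]; exact hnbnat)]
            simp only [List.mem_append, List.mem_singleton]
            constructor
            · intro _
              right
              omega
            · intro _
              trivial
          · rw [List.getElem?_set_ne (Ne.symm hjn)]
            rw [hinv.vis j hj]
            simp only [List.mem_append, List.mem_singleton]
            constructor
            · exact fun h => Or.inl h
            · rintro (h | h)
              · exact h
              · exfalso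
                apply hjn
                omega
        · rw [hassoc, List.head?_append, hinv.head]
          rfl
        · show PySem.List.pyGetD (PySem.List.pySetD parents nb node) 0 (-1) = -1
          rw [pv_getD_setD parents nb 0 node (-1) hb0 (by rw [hplen]; exact_mod_cast hbn)
            le_rfl (by rw [hplen]; exact_mod_cast hn1), if_neg (Ne.symm hnb0)]
          exact hinv.root
        · rw [hassoc]
          intro v hv hv0
          rcases List.mem_append.1 hv with h | h
          · obtain ⟨hadjv, hbef⟩ := hinv.par v h hv0
            have hvrng := hinv.rng v h
            have hvne : v ≠ nb := fun he => hnbnotin (he ▸ h)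
            have : pvPar (PySem.List.pySetD parents nb node) v = pvPar parents v := by
              show PySem.List.pyGetD _ v (-1) = _
              rw [pv_getD_setD parents nb v node (-1) hb0 (by rw [hplen]; exact_mod_cast hbn)
                hvrng.1 (by rw [hplen]; exact_mod_cast hvrng.2), if_neg hvne]
              rfl
            rw [this]
            exact ⟨hadjv, pv_before_append _ [nb] _ _ hbef⟩
          · simp only [List.mem_singleton] at h
            subst h
            have hself : pvPar (PySem.List.pySetD parents v node) v = node := by
              show PySem.List.pyGetD _ v (-1) = node
              rw [pv_getD_setD parents v v node (-1) hb0 (by rw [hplen]; exact_mod_cast hbn)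
                hb0 (by rw [hplen]; exact_mod_cast hbn), if_pos rfl]
            rw [hself]
            refine ⟨hnbadj, ⟨order.length, (order ++ [node] ++ queue).length, by simp, ?_, ?_⟩⟩
            · rw [show (order ++ [node] ++ queue) ++ [v] = order ++ ([node] ++ (queue ++ [v]))
                by simp]
              rw [List.getElem?_append_right le_rfl]
              simp
            · rw [List.getElem?_append_right le_rfl]
              simp
      obtain ⟨hcore, hmem, post', hpost'⟩ :=
        ih (fun x hx => hadj x (List.mem_cons_of_mem _ hx))
          (PySem.List.pySetD visited nb true) (PySem.List.pySetD parents nb node)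
          (queue ++ [nb]) hcore'
      refine ⟨hcore, ?_, ⟨[nb] ++ post', by rw [hpost']; simp⟩⟩
      intro x hx
      rcases List.mem_cons.1 hx with rfl | hx
      · refine List.mem_append.2 (Or.inr ?_)
        rw [hpost']
        exact List.mem_append.2 (Or.inl (by simp))
      · exact hmem x hx
    · rw [if_neg hc]
      have hvlen := hinv.vlen
      have hnbvisT : nb ∈ order ++ [node] ++ queue := by
        have hgetv : PySem.List.pyGetD visited nb true = visited[nb.toNat] :=
          PySem.List.pyGetD_eq_getElem visited true hb0 (by rw [hvlen]; exact_mod_cast hbn)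
        have hbt : visited[nb.toNat] = true := by
          rcases Bool.eq_false_or_eq_true visited[nb.toNat] with h | h
          · exact h
          · exact absurd (hgetv.trans h) hc
        have h1 := (hinv.vis nb.toNat (by omega : nb.toNat < n)).1 (by
          rw [List.getElem?_eq_getElem (by rw [hvlen]; omega), hbt])
        rwa [Int.toNat_of_nonneg hb0] at h1
      obtain ⟨hcore, hmem, post, hpost⟩ :=
        ih (fun x hx => hadj x (List.mem_cons_of_mem _ hx)) visited parents queue hinv
      refine ⟨hcore, ?_, ⟨post, hpost⟩⟩
      intro x hx
      rcases List.mem_cons.1 hx with rfl | hx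
      · rcases List.mem_append.1 hnbvisT with h | h
        · exact List.mem_append.2 (Or.inl h)
        · refine List.mem_append.2 (Or.inr ?_)
          rw [hpost]
          exact List.mem_append.2 (Or.inl h)
      · exact hmem x hx

theorem pv_bfs_spec (n : Nat) (edges : List (List Int))
    (hE : ∀ e ∈ edges, pvEdgeOK (n : Int) e = true)
    (hshape : ∀ e ∈ edges, ∃ u v : Int, e = [u, v]) :
    ∀ (fuel : Nat) (visited : List Bool) (queue parents order : List Int),
      pvBCore n edges visited queue parents order →
      (∀ u ∈ order, ∀ x, pvAdj edges u x → x ∈ order ++ queue) →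
      n - order.length < fuel →
      pvBFinal n edges (pvBfsLoop (pvGraphA edges) fuel visited queue parents order).1
        (pvBfsLoop (pvGraphA edges) fuel visited queue parents order).2 ∧
      ∀ x ∈ order ++ queue, x ∈ (pvBfsLoop (pvGraphA edges) fuel visited queue parents order).2 := by
  intro fuel
  induction fuel with
  | zero =>
    intro visited queue parents order _ _ hf
    omega
  | succ fuel ih =>
    intro visited queue parents order hinv hcl hf
    match queue with
    | [] =>
      show pvBFinal n edges parents order ∧ ∀ x ∈ order ++ [], x ∈ order
      have hnd : order.Nodup := by simpa using hinv.nodup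
      have hrng : ∀ v ∈ order, 0 ≤ v ∧ v < n := by
        intro v hv; exact hinv.rng v (by simpa using hv)
      have hhead : order.head? = some 0 := by
        have := hinv.head; simpa using this
      have hpar : ∀ v ∈ order, v ≠ 0 →
          pvAdj edges (pvPar parents v) v ∧ pvBefore order (pvPar parents v) v := by
        intro v hv hv0
        have := hinv.par v (by simpa using hv) hv0
        simpa using this
      refine ⟨⟨hnd, hrng, hhead, hinv.root, hpar, ?_⟩, ?_⟩
      · intro u hu x hadj
        have := hcl u hu x hadj
        simpa using this
      · intro x hx
        simpa using hx
    | node :: qs =>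
      have hLeq : order ++ node :: qs = (order ++ [node]) ++ qs := by simp
      have hcore1 : pvBCore n edges visited qs parents (order ++ [node]) := by
        refine ⟨hinv.vlen, hinv.plen, ?_, ?_, ?_, ?_, hinv.root, ?_⟩
        · have := hinv.nodup; rwa [hLeq] at this
        · intro v hv; exact hinv.rng v (by rwa [hLeq])
        · intro j hj; rw [← hLeq]; exact hinv.vis j hj
        · rw [← hLeq]; exact hinv.head
        · intro v hv hv0; rw [← hLeq]; exact hinv.par v (by rwa [hLeq]) hv0
      have hshape' := hshape
      obtain ⟨hcore2, hmemnb, post, hpost⟩ :=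
        pv_bfs_inner n edges hE node order ((pvGraphA edges).getD node [])
          (fun x hx => (pv_graphA_mem edges hshape node x).1 hx)
          visited parents qs hcore1
      have hcl' : ∀ u ∈ order ++ [node], ∀ x, pvAdj edges u x →
          x ∈ (order ++ [node]) ++
            (((pvGraphA edges).getD node []).foldl
              (fun (st : List Bool × List Int × List Int) nb =>
                if PySem.List.pyGetD st.1 nb true = false then
                  (PySem.List.pySetD st.1 nb true, PySem.List.pySetD st.2.1 nb node, st.2.2 ++ [nb])
                else st)
              (visited, parents, qs)).2.2 := by
        intro u hu x hadj
        rcases List.mem_append.1 hu with h | h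
        · have := hcl u h x hadj
          rw [hLeq] at this
          rcases List.mem_append.1 this with h' | h'
          · exact List.mem_append.2 (Or.inl h')
          · refine List.mem_append.2 (Or.inr ?_)
            rw [hpost]
            exact List.mem_append.2 (Or.inl h')
        · simp only [List.mem_singleton] at h
          subst h
          exact hmemnb x ((pv_graphA_mem edges hshape u x).2 hadj)
      have hlenle := pv_len_le n _ hcore2.nodup hcore2.rng
      have hords : order.length + 1 ≤ n := by
        rw [List.length_append, List.length_append] at hlenle
        simp only [List.length_cons, List.length_nil] at hlenle
        omega
      have hstep := ih _ _ _ _ hcore2 hcl' (by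
        rw [List.length_append]
        simp only [List.length_cons, List.length_nil]
        omega)
      refine ⟨hstep.1, ?_⟩
      intro x hx
      refine hstep.2 x ?_
      rw [hLeq] at hx
      rcases List.mem_append.1 hx with h | h
      · exact List.mem_append.2 (Or.inl h)
      · refine List.mem_append.2 (Or.inr ?_)
        rw [hpost]
        exact List.mem_append.2 (Or.inl h)

-- == connectivity: the closure iteration reaches every node, hence so does the BFS order ==

theorem pv_grow_subset (edges : List (List Int)) (S : Int → Prop)
    (hcl : ∀ u x, S u → pvAdj edges u x → S x) (s : List Int) (hs : ∀ x ∈ s, S x) :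
    ∀ x ∈ pvGrow edges s, S x := by
  unfold pvGrow
  -- generalize over a sublist of edges keeping adjacency facts
  suffices h : ∀ (es : List (List Int)), (∀ e ∈ es, e ∈ edges) →
      ∀ (s : List Int), (∀ x ∈ s, S x) → ∀ x ∈ es.foldl (fun s e =>
        match e with
        | [u, v] =>
          if u ∈ s ∧ v ∉ s then s ++ [v]
          else if v ∈ s ∧ u ∉ s then s ++ [u]
          else s
        | _ => s) s, S x by
    exact h edges (fun _ he => he) s hs
  intro es
  induction es with
  | nil => intro _ s hs x hx; exact hs x hx
  | cons e t ih =>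
    intro hsub s hs x hx
    refine ih (fun e' he' => hsub e' (by simp [he'])) _ ?_ x hx
    intro y hy
    match e with
    | [] => exact hs y hy
    | [u] => exact hs y hy
    | u :: v :: w :: r => exact hs y hy
    | [u, v] =>
      simp only at hy
      split_ifs at hy with h1 h2
      · rcases List.mem_append.1 hy with h | h
        · exact hs y h
        · simp at h; subst h
          exact hcl u y (hs u h1.1) (Or.inl (hsub _ (by simp)))
      · rcases List.mem_append.1 hy with h | h
        · exact hs y h
        · simp at h; subst h
          exact hcl v y (hs v h2.1) (Or.inr (hsub _ (by simp)))
      · exact hs y hy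

theorem pv_grow_sub_lemmas (n : Int) (edges : List (List Int))
    (hE : ∀ e ∈ edges, pvEdgeOK n e = true) (s : List Int)
    (hnd : s.Nodup) (hrng : ∀ x ∈ s, 0 ≤ x ∧ x < n) :
    (pvGrow edges s).Nodup ∧ (∀ x ∈ pvGrow edges s, 0 ≤ x ∧ x < n) ∧
      (∃ post, pvGrow edges s = s ++ post) := by
  unfold pvGrow
  induction edges generalizing s with
  | nil => exact ⟨hnd, hrng, [], by simp⟩
  | cons e t ih =>
    have hte : ∀ e ∈ t, pvEdgeOK n e = true := fun e' he' => hE e' (by simp [he'])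
    simp only [List.foldl_cons]
    match e with
    | [] => exact ih hte s hnd hrng
    | [u] => exact ih hte s hnd hrng
    | u :: v :: w :: r => exact ih hte s hnd hrng
    | [u, v] =>
      have hok := hE [u, v] (by simp)
      simp [pvEdgeOK] at hok
      simp only
      split_ifs with h1 h2
      · have hnd' : (s ++ [v]).Nodup := by
          rw [List.nodup_append]
          exact ⟨hnd, by simp, by simp; intro a ha hav; exact h1.2 (hav ▸ ha)⟩
        have hrng' : ∀ x ∈ s ++ [v], 0 ≤ x ∧ x < n := by
          intro x hx; rcases List.mem_append.1 hx with h | h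
          · exact hrng x h
          · simp only [List.mem_singleton] at h; subst h; omega
        obtain ⟨hh1, hh2, post, hh3⟩ := ih hte _ hnd' hrng'
        exact ⟨hh1, hh2, [v] ++ post, by simp [hh3]⟩
      · have hnd' : (s ++ [u]).Nodup := by
          rw [List.nodup_append]
          exact ⟨hnd, by simp, by simp; intro a ha hav; exact h2.2 (hav ▸ ha)⟩
        have hrng' : ∀ x ∈ s ++ [u], 0 ≤ x ∧ x < n := by
          intro x hx; rcases List.mem_append.1 hx with h | h
          · exact hrng x h
          · simp only [List.mem_singleton] at h; subst h; omega
        obtain ⟨hh1, hh2, post, hh3⟩ := ih hte _ hnd' hrng'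
        exact ⟨hh1, hh2, [u] ++ post, by simp [hh3]⟩
      · exact ih hte s hnd hrng

theorem pv_closure_all (n : Nat) (hn : 0 < n) (edges : List (List Int))
    (hE : ∀ e ∈ edges, pvEdgeOK (n : Int) e = true)
    (hconn : ((pvGrow edges)^[n] [(0:Int)]).length = n) :
    ∀ j : Int, 0 ≤ j → j < n → j ∈ (pvGrow edges)^[n] [(0:Int)] := by
  have base : ∀ k : Nat, ((pvGrow edges)^[k] [(0:Int)]).Nodup ∧
      (∀ x ∈ (pvGrow edges)^[k] [(0:Int)], 0 ≤ x ∧ x < n) := by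
    intro k
    induction k with
    | zero =>
      constructor
      · simp
      · simp; omega
    | succ k ih =>
      rw [Function.iterate_succ_apply']
      exact ⟨(pv_grow_sub_lemmas n edges hE _ ih.1 ih.2).1,
        (pv_grow_sub_lemmas n edges hE _ ih.1 ih.2).2.1⟩
  obtain ⟨hnd, hrng⟩ := base n
  set C := (pvGrow edges)^[n] [(0:Int)] with hC
  intro j hj0 hjn
  -- C.toFinset ⊆ Ico 0 n with equal cards
  have hsub : C.toFinset ⊆ Finset.Ico (0:Int) n := by
    intro x hx
    simp only [List.mem_toFinset] at hx
    have := hrng x hx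
    simp [Finset.mem_Ico]; omega
  have hcard : C.toFinset.card = n := by
    rw [List.toFinset_card_of_nodup hnd, hconn]
  have : C.toFinset = Finset.Ico (0:Int) n := by
    apply Finset.eq_of_subset_of_card_le hsub
    rw [hcard]
    simp [Int.card_Ico]
  have : j ∈ C.toFinset := by rw [this]; simp [Finset.mem_Ico]; omega
  simpa using this

theorem pv_good_of_final (n : Nat) (hn : 0 < n) (edges : List (List Int))
    (hE : ∀ e ∈ edges, pvEdgeOK (n : Int) e = true)
    (hconn : ((pvGrow edges)^[n] [(0:Int)]).length = n)
    (parents ord : List Int) (hf : pvBFinal n edges parents ord) (h0 : (0:Int) ∈ ord) :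
    pvGood n edges parents ord := by
  obtain ⟨hnd, hrng, hhead, hroot, hpar, hcl⟩ := hf
  refine ⟨hnd, ?_, hhead, hroot, hpar⟩
  intro v
  constructor
  · exact hrng v
  · rintro ⟨h1, h2⟩
    have hclosure : ∀ x ∈ (pvGrow edges)^[n] [(0:Int)], x ∈ ord := by
      have : ∀ k : Nat, ∀ x ∈ (pvGrow edges)^[k] [(0:Int)], x ∈ ord := by
        intro k
        induction k with
        | zero => intro x hx; simp at hx; subst hx; exact h0
        | succ k ih =>
          rw [Function.iterate_succ_apply']
          exact pv_grow_subset edges (· ∈ ord) (fun u x hu hadj => hcl u hu x hadj) _ ih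
      exact this n
    exact hclosure v (pv_closure_all n hn edges hE hconn v h1 h2)

theorem pv_ord_length (n : Nat) (edges : List (List Int)) (parents ord : List Int)
    (good : pvGood n edges parents ord) : ord.length = n := by
  have h1 : ord.toFinset = Finset.Ico (0:Int) n := by
    ext x
    simp only [List.mem_toFinset, good.mem, Finset.mem_Ico]
  have := List.toFinset_card_of_nodup good.nodup
  rw [h1] at this
  simpa [Int.card_Ico] using this.symm

theorem pv_chl_length (n : Nat) (edges : List (List Int)) (parents ord : List Int)
    (good : pvGood n edges parents ord) (hn : 0 < n) :
    (ord.filter (· ≠ 0)).length + 1 = n := by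
  have h0 : (0:Int) ∈ ord := (good.mem 0).2 (by constructor <;> omega)
  have hcnt : ord.count (0:Int) = 1 := List.count_eq_one_of_mem good.nodup h0
  have hsplit := List.length_eq_length_filter_add (l := ord) (fun v => decide (v ≠ 0))
  have h2 : (ord.filter (fun v => !decide (v ≠ 0))).length = 1 := by
    have he : ord.filter (fun v => !decide (v ≠ 0)) = ord.filter (fun v => v == 0) := by
      apply List.filter_congr; intro x _
      by_cases hx : x = 0 <;> simp [hx]
    rw [he, ← List.count_eq_length_filter, hcnt]
  have hlen := pv_ord_length n edges parents ord good
  omega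

theorem pv_cover (n : Nat) (edges : List (List Int)) (parents ord : List Int)
    (good : pvGood n edges parents ord)
    (_hE : ∀ e ∈ edges, pvEdgeOK (n : Int) e = true)
    (hND : (edges.map pvNorm).Nodup) (hlen : edges.length + 1 = n) :
    (edges.map pvNorm).Perm
      ((ord.filter (· ≠ 0)).map (fun v => (min (pvPar parents v) v, max (pvPar parents v) v))) := by
  have hmemchl : ∀ v ∈ ord.filter (· ≠ 0), v ∈ ord ∧ v ≠ 0 := by
    intro v hv
    simp only [List.mem_filter, decide_eq_true_eq] at hv
    exact ⟨hv.1, by simpa using hv.2⟩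
  -- each parent pair is the norm of an actual edge
  have hmem1 : ∀ v ∈ ord.filter (· ≠ 0),
      (min (pvPar parents v) v, max (pvPar parents v) v) ∈ edges.map pvNorm := by
    intro v hv
    obtain ⟨hvo, hv0⟩ := hmemchl v hv
    obtain ⟨hadj, _⟩ := good.par v hvo hv0
    rcases hadj with h | h
    · exact List.mem_map.2 ⟨_, h, by simp [pvNorm]⟩
    · exact List.mem_map.2 ⟨_, h, by simp [pvNorm, min_comm, max_comm]⟩
  -- the parent-pair list is nodup
  have hndchl : ((ord.filter (· ≠ 0)).map
      (fun v => (min (pvPar parents v) v, max (pvPar parents v) v))).Nodup := by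
    refine List.Nodup.map_on ?_ (good.nodup.filter _)
    intro v hv w hw heq
    obtain ⟨hvo, hv0⟩ := hmemchl v hv
    obtain ⟨hwo, hw0⟩ := hmemchl w hw
    rcases pv_minmax_eq _ _ _ _ heq with ⟨h1, h2⟩ | ⟨h1, h2⟩
    · exact h2
    · -- pvPar v = w and v = pvPar w : mutual before, impossible
      exfalso
      obtain ⟨_, hb1⟩ := good.par v hvo hv0
      obtain ⟨_, hb2⟩ := good.par w hwo hw0
      rw [h1] at hb1
      rw [← h2] at hb2
      exact pv_before_asymm ord good.nodup w v hb1 hb2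
  -- equal lengths
  have hn : 0 < n := by omega
  have hlc := pv_chl_length n edges parents ord good hn
  have hlene : (edges.map pvNorm).length =
      ((ord.filter (· ≠ 0)).map (fun v => (min (pvPar parents v) v, max (pvPar parents v) v))).length := by
    simp only [List.length_map]
    omega
  -- subset + nodup + equal length gives a permutation
  have hsub : ((ord.filter (· ≠ 0)).map
      (fun v => (min (pvPar parents v) v, max (pvPar parents v) v))).toFinset ⊆ (edges.map pvNorm).toFinset := by
    intro x hx
    simp only [List.mem_toFinset] at hx ⊢
    obtain ⟨v, hv, rfl⟩ := List.mem_map.1 hx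
    exact hmem1 v hv
  have hfeq : (edges.map pvNorm).toFinset = ((ord.filter (· ≠ 0)).map
      (fun v => (min (pvPar parents v) v, max (pvPar parents v) v))).toFinset := by
    refine (Finset.eq_of_subset_of_card_le hsub ?_).symm
    rw [List.toFinset_card_of_nodup hND, List.toFinset_card_of_nodup hndchl]
    omega
  exact List.perm_of_nodup_nodup_toFinset_eq hND hndchl hfeq

-- == subtree sums: stability and the defining recurrence ==

theorem pv_chl_mem (parents ord : List Int) (u x : Int) :
    u ∈ pvChl parents ord x ↔ u ∈ ord ∧ u ≠ 0 ∧ pvPar parents u = x := by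
  simp [pvChl, List.mem_filter]

theorem pv_chl_before (n : Nat) (edges : List (List Int)) (parents ord : List Int)
    (good : pvGood n edges parents ord) (i : Nat) (v : Int) (hi : ord[i]? = some v)
    (u : Int) (hu : u ∈ pvChl parents ord v) : ∃ j : Nat, i < j ∧ ord[j]? = some u := by
  obtain ⟨huo, hu0, hup⟩ := (pv_chl_mem parents ord u v).1 hu
  obtain ⟨_, hb⟩ := good.par u huo hu0
  rw [hup] at hb
  obtain ⟨i', j', hij, hi', hj'⟩ := hb
  have : i' = i := pv_idx_unique ord good.nodup i' i v hi' hi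
  exact ⟨j', by omega, hj'⟩

theorem pv_sf_congr (n : Nat) (edges : List (List Int)) (a0 parents ord : List Int)
    (good : pvGood n edges parents ord) :
    ∀ (d i : Nat) (v : Int), ord[i]? = some v → ord.length - i ≤ d →
      ∀ m₁ m₂ : Nat, ord.length - i ≤ m₁ → ord.length - i ≤ m₂ →
        pvSf a0 parents ord m₁ v = pvSf a0 parents ord m₂ v := by
  intro d
  induction d with
  | zero =>
    intro i v hi hd
    have := (List.getElem?_eq_some_iff.1 hi).1
    omega
  | succ d ih =>
    intro i v hi hd m₁ m₂ h1 h2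
    have hiL := (List.getElem?_eq_some_iff.1 hi).1
    obtain ⟨f₁, rfl⟩ : ∃ f, m₁ = f + 1 := ⟨m₁ - 1, by omega⟩
    obtain ⟨f₂, rfl⟩ : ∃ f, m₂ = f + 1 := ⟨m₂ - 1, by omega⟩
    show PySem.List.pyGetD a0 v 0 + _ = PySem.List.pyGetD a0 v 0 + _
    congr 1
    refine congrArg List.sum (List.map_congr_left ?_)
    intro u hu
    obtain ⟨j, hij, hj⟩ := pv_chl_before n edges parents ord good i v hi u hu
    exact ih j u hj (by omega) f₁ f₂ (by omega) (by omega)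

theorem pv_sf_stable (n : Nat) (edges : List (List Int)) (a0 parents ord : List Int)
    (good : pvGood n edges parents ord) :
    ∀ (m i : Nat) (v : Int), ord[i]? = some v → ord.length - i ≤ m →
      pvSf a0 parents ord m v = pvS a0 parents ord v := by
  intro m i v hi hm
  exact pv_sf_congr n edges a0 parents ord good (ord.length - i) i v hi le_rfl m ord.length hm
    (by omega)

theorem pv_s_rec (n : Nat) (edges : List (List Int)) (a0 parents ord : List Int)
    (good : pvGood n edges parents ord) (v : Int) (hv : v ∈ ord) :
    pvS a0 parents ord v
      = PySem.List.pyGetD a0 v 0 + ((pvChl parents ord v).map (pvS a0 parents ord)).sum := by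
  obtain ⟨i, hiL, hi⟩ := List.mem_iff_getElem.1 hv
  have hi' : ord[i]? = some v := List.getElem?_eq_some_iff.2 ⟨hiL, hi⟩
  obtain ⟨f, hf⟩ : ∃ f, ord.length = f + 1 := ⟨ord.length - 1, by omega⟩
  show pvSf a0 parents ord ord.length v = _
  rw [hf]
  show PySem.List.pyGetD a0 v 0 + _ = PySem.List.pyGetD a0 v 0 + _
  congr 1
  refine congrArg List.sum (List.map_congr_left ?_)
  intro u hu
  obtain ⟨j, hij, hj⟩ := pv_chl_before n edges parents ord good i v hi' u hu
  have hjL := (List.getElem?_eq_some_iff.1 hj).1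
  exact pv_sf_stable n edges a0 parents ord good f j u hj (by omega)

-- == A side: the reversed accumulation pass computes the sum of |subtree sum| ==

theorem pv_chl_drop (n : Nat) (edges : List (List Int)) (parents ord : List Int)
    (good : pvGood n edges parents ord) (k : Nat) (hk : k < ord.length) (v : Int)
    (hv : ord[k]? = some v) :
    (ord.drop (k+1)).filter (fun u => decide (u ≠ 0) && (pvPar parents u == v))
      = pvChl parents ord v := by
  unfold pvChl
  have hsplit : ord.filter (fun u => decide (u ≠ 0) && (pvPar parents u == v))
      = (ord.take (k+1)).filter (fun u => decide (u ≠ 0) && (pvPar parents u == v))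
        ++ (ord.drop (k+1)).filter (fun u => decide (u ≠ 0) && (pvPar parents u == v)) := by
    rw [← List.filter_append, List.take_append_drop]
  have hnil : (ord.take (k+1)).filter (fun u => decide (u ≠ 0) && (pvPar parents u == v)) = [] := by
    rw [List.filter_eq_nil_iff]
    intro u hu hP
    have hchl : u ∈ pvChl parents ord v := by
      unfold pvChl
      refine List.mem_filter.2 ⟨List.mem_of_mem_take hu, hP⟩
    obtain ⟨j, hkj, hj⟩ := pv_chl_before n edges parents ord good k v hv u hchl
    obtain ⟨i', hi'len, hi'⟩ := List.mem_iff_getElem.1 hu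
    have hi'k : i' < k + 1 := lt_of_lt_of_le hi'len (by simpa using List.length_take_le (k+1) ord)
    have : ord[i']? = some u := by
      rw [List.getElem_take] at hi'
      exact List.getElem?_eq_some_iff.2 ⟨by omega, hi'⟩
    have := pv_idx_unique ord good.nodup i' j u this hj
    omega
  rw [hsplit, hnil, List.nil_append]

theorem pv_phase2_aux (n : Nat) (edges : List (List Int)) (a0 parents ord : List Int)
    (good : pvGood n edges parents ord)
    (hE : ∀ e ∈ edges, pvEdgeOK (n : Int) e = true) (ha0 : a0.length = n) :
    ∀ (m k : Nat), k + m = ord.length →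
      (((ord.drop k).reverse).foldl
        (fun (st : List Int × Int) node =>
          let parent := PySem.List.pyGetD parents node (-1)
          if parent ≠ -1 then
            let aArr := PySem.List.pySetD st.1 parent
              (PySem.List.pyGetD st.1 parent 0 + PySem.List.pyGetD st.1 node 0)
            (aArr, st.2 + |PySem.List.pyGetD aArr node 0|)
          else st)
        (a0, 0)).1.length = n ∧
      (∀ x : Int, 0 ≤ x → x < n →
        PySem.List.pyGetD (((ord.drop k).reverse).foldl
          (fun (st : List Int × Int) node =>
            let parent := PySem.List.pyGetD parents node (-1)
            if parent ≠ -1 then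
              let aArr := PySem.List.pySetD st.1 parent
                (PySem.List.pyGetD st.1 parent 0 + PySem.List.pyGetD st.1 node 0)
              (aArr, st.2 + |PySem.List.pyGetD aArr node 0|)
            else st)
          (a0, 0)).1 x 0
          = PySem.List.pyGetD a0 x 0
            + (((ord.drop k).filter (fun u => decide (u ≠ 0) && (pvPar parents u == x))).map
                (pvS a0 parents ord)).sum) ∧
      (((ord.drop k).reverse).foldl
        (fun (st : List Int × Int) node =>
          let parent := PySem.List.pyGetD parents node (-1)
          if parent ≠ -1 then
            let aArr := PySem.List.pySetD st.1 parent
              (PySem.List.pyGetD st.1 parent 0 + PySem.List.pyGetD st.1 node 0)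
            (aArr, st.2 + |PySem.List.pyGetD aArr node 0|)
          else st)
        (a0, 0)).2
        = (((ord.drop k).filter (· ≠ 0)).map (fun v => |pvS a0 parents ord v|)).sum := by
  intro m
  induction m with
  | zero =>
    intro k hk
    have : ord.drop k = [] := List.drop_eq_nil_of_le (by omega)
    rw [this]
    exact ⟨ha0, fun x _ _ => by simp, by simp⟩
  | succ m ih =>
    intro k hk
    obtain ⟨ihlen, iharr, ihtot⟩ := ih (k+1) (by omega)
    have hkL : k < ord.length := by omega
    have hv : ord[k]? = some ord[k] := List.getElem?_eq_some_iff.2 ⟨hkL, rfl⟩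
    set v := ord[k] with hvdef
    have hdropk : ord.drop k = v :: ord.drop (k+1) := List.drop_eq_getElem_cons hkL
    rw [hdropk]
    simp only [List.reverse_cons, List.foldl_append, List.foldl_cons, List.foldl_nil]
    set st' := ((ord.drop (k+1)).reverse).foldl
        (fun (st : List Int × Int) node =>
          let parent := PySem.List.pyGetD parents node (-1)
          if parent ≠ -1 then
            let aArr := PySem.List.pySetD st.1 parent
              (PySem.List.pyGetD st.1 parent 0 + PySem.List.pyGetD st.1 node 0)
            (aArr, st.2 + |PySem.List.pyGetD aArr node 0|)
          else st)
        (a0, 0) with hst'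
    have hvmem : v ∈ ord := List.getElem_mem hkL
    by_cases hv0 : v = 0
    · -- the root is skipped
      have hroot : PySem.List.pyGetD parents v (-1) = -1 := by rw [hv0]; exact good.root
      simp only [hroot, ne_eq, not_true_eq_false, if_false, reduceIte]
      refine ⟨ihlen, ?_, ?_⟩
      · intro x hx0 hxn
        rw [iharr x hx0 hxn, List.filter_cons]
        simp [hv0]
      · rw [ihtot, List.filter_cons]
        simp [hv0]
    · -- a proper node: fold its subtree sum into the parent
      obtain ⟨hadj, hbef⟩ := good.par v hvmem hv0
      set p := pvPar parents v with hpdef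
      have hppar : PySem.List.pyGetD parents v (-1) = p := by rw [hpdef]; rfl
      obtain ⟨hp0, hpn, _, _, _⟩ := pv_adj_bounds n edges hE p v hadj
      have hvrng := (good.mem v).1 hvmem
      have hpv : p ≠ v := pv_before_ne ord good.nodup p v hbef
      have hpne : PySem.List.pyGetD parents v (-1) ≠ -1 := by rw [hppar]; omega
      simp only [hpne, ne_eq, not_false_eq_true, if_true, reduceIte]
      have hchl : (ord.drop (k+1)).filter (fun u => decide (u ≠ 0) && (pvPar parents u == v))
          = pvChl parents ord v := pv_chl_drop n edges parents ord good k hkL v hv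
      have hstv : PySem.List.pyGetD st'.1 v 0 = pvS a0 parents ord v := by
        rw [iharr v (by omega) (by omega), hchl, ← pv_s_rec n edges a0 parents ord good v hvmem]
      have harrlen : ∀ j : Int, 0 ≤ j → j < n →
          PySem.List.pyGetD (PySem.List.pySetD st'.1 p
              (PySem.List.pyGetD st'.1 p 0 + PySem.List.pyGetD st'.1 v 0)) j 0
            = if j = p then PySem.List.pyGetD st'.1 p 0 + PySem.List.pyGetD st'.1 v 0
              else PySem.List.pyGetD st'.1 j 0 := by
        intro j hj0 hjn
        exact pv_getD_setD st'.1 p j _ 0 hp0 (by omega) hj0 (by omega)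
      refine ⟨by rw [hppar, PySem.List.length_pySetD]; exact ihlen, ?_, ?_⟩
      · intro x hx0 hxn
        rw [hppar, harrlen x hx0 hxn, List.filter_cons]
        by_cases hxp : x = p
        · subst hxp
          have hcond : (decide (v ≠ 0) && (pvPar parents v == p)) = true := by
            rw [← hpdef]; simp [hv0]
          rw [hcond, if_pos rfl, if_pos rfl]
          simp only [List.map_cons, List.sum_cons]
          rw [iharr p hx0 hxn, hstv]
          ring
        · have hcond : (decide (v ≠ 0) && (pvPar parents v == x)) = false := by
            rw [← hpdef]
            simp only [Bool.and_eq_false_iff]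
            right
            simpa using (Ne.symm hxp)
          rw [hcond, if_neg hxp, iharr x hx0 hxn]
          simp
      · rw [hppar, harrlen v (by omega) (by omega), if_neg hpv.symm, hstv, ihtot,
          List.filter_cons]
        have hcond : (decide (v ≠ 0) = true) := by simpa using hv0
        rw [if_pos hcond]
        simp only [List.map_cons, List.sum_cons]
        ring

theorem pv_phase2 (n : Nat) (edges : List (List Int)) (a0 parents ord : List Int)
    (good : pvGood n edges parents ord)
    (hE : ∀ e ∈ edges, pvEdgeOK (n : Int) e = true) (ha0 : a0.length = n) :
    ∀ k, k ≤ ord.length →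
      (((ord.drop k).reverse).foldl
        (fun (st : List Int × Int) node =>
          let parent := PySem.List.pyGetD parents node (-1)
          if parent ≠ -1 then
            let aArr := PySem.List.pySetD st.1 parent
              (PySem.List.pyGetD st.1 parent 0 + PySem.List.pyGetD st.1 node 0)
            (aArr, st.2 + |PySem.List.pyGetD aArr node 0|)
          else st)
        (a0, 0)).2
      = (((ord.drop k).filter (· ≠ 0)).map (fun v => |pvS a0 parents ord v|)).sum := by
  intro k hexpr
  exact (pv_phase2_aux n edges a0 parents ord good hE ha0 (ord.length - k) k (by omega)).2.2

-- == B side: the initial degree / neighbour-sum arrays ==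

def pvCDeg (j : Int) : List Int → Int
  | [u, v] => (if u = j then 1 else 0) + (if v = j then 1 else 0)
  | _ => 0

def pvCNs (j : Int) : List Int → Int
  | [u, v] => (if u = j then v else 0) + (if v = j then u else 0)
  | _ => 0

theorem pv_initDegNs_aux (n : Nat) (edges : List (List Int))
    (hE : ∀ e ∈ edges, pvEdgeOK (n : Int) e = true) :
    (edges.foldl
      (fun (st : List Int × List Int) e =>
        match e with
        | [u, v] =>
          let deg := PySem.List.pySetD st.1 u (PySem.List.pyGetD st.1 u 0 + 1)
          let deg := PySem.List.pySetD deg v (PySem.List.pyGetD deg v 0 + 1)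
          let ns := PySem.List.pySetD st.2 u (PySem.List.pyGetD st.2 u 0 + v)
          let ns := PySem.List.pySetD ns v (PySem.List.pyGetD ns v 0 + u)
          (deg, ns)
        | _ => st)
      (List.replicate n (0:Int), List.replicate n (0:Int))).1.length = n ∧
    (edges.foldl
      (fun (st : List Int × List Int) e =>
        match e with
        | [u, v] =>
          let deg := PySem.List.pySetD st.1 u (PySem.List.pyGetD st.1 u 0 + 1)
          let deg := PySem.List.pySetD deg v (PySem.List.pyGetD deg v 0 + 1)
          let ns := PySem.List.pySetD st.2 u (PySem.List.pyGetD st.2 u 0 + v)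
          let ns := PySem.List.pySetD ns v (PySem.List.pyGetD ns v 0 + u)
          (deg, ns)
        | _ => st)
      (List.replicate n (0:Int), List.replicate n (0:Int))).2.length = n ∧
    ∀ j : Int, 0 ≤ j → j < n →
      PySem.List.pyGetD (edges.foldl
        (fun (st : List Int × List Int) e =>
          match e with
          | [u, v] =>
            let deg := PySem.List.pySetD st.1 u (PySem.List.pyGetD st.1 u 0 + 1)
            let deg := PySem.List.pySetD deg v (PySem.List.pyGetD deg v 0 + 1)
            let ns := PySem.List.pySetD st.2 u (PySem.List.pyGetD st.2 u 0 + v)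
            let ns := PySem.List.pySetD ns v (PySem.List.pyGetD ns v 0 + u)
            (deg, ns)
          | _ => st)
        (List.replicate n (0:Int), List.replicate n (0:Int))).1 j 0
        = (edges.map (pvCDeg j)).sum ∧
      PySem.List.pyGetD (edges.foldl
        (fun (st : List Int × List Int) e =>
          match e with
          | [u, v] =>
            let deg := PySem.List.pySetD st.1 u (PySem.List.pyGetD st.1 u 0 + 1)
            let deg := PySem.List.pySetD deg v (PySem.List.pyGetD deg v 0 + 1)
            let ns := PySem.List.pySetD st.2 u (PySem.List.pyGetD st.2 u 0 + v)
            let ns := PySem.List.pySetD ns v (PySem.List.pyGetD ns v 0 + u)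
            (deg, ns)
          | _ => st)
        (List.replicate n (0:Int), List.replicate n (0:Int))).2 j 0
        = (edges.map (pvCNs j)).sum := by
  induction edges using List.reverseRecOn with
  | nil =>
    refine ⟨by simp, by simp, ?_⟩
    intro j hj0 hjn
    constructor <;>
      simp [PySem.List.pyGetD_eq_getElem (List.replicate n (0:Int)) (0:Int) hj0 (by simpa using hjn)]
  | append_singleton es e ih =>
    have hes : ∀ e' ∈ es, pvEdgeOK (n : Int) e' = true := fun e' he' => hE e' (by simp [he'])
    obtain ⟨ih1, ih2, ih3⟩ := ih hes
    have hok := hE e (by simp)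
    rw [List.foldl_append]
    match e with
    | [] => simp [pvEdgeOK] at hok
    | [u] => simp [pvEdgeOK] at hok
    | u :: v :: w :: r => simp [pvEdgeOK] at hok
    | [u, v] =>
      simp only [pvEdgeOK, Bool.and_eq_true, decide_eq_true_eq] at hok
      obtain ⟨⟨⟨⟨hu0, hun⟩, hv0⟩, hvn⟩, huv⟩ := hok
      simp only [List.foldl_cons, List.foldl_nil]
      refine ⟨by simp [PySem.List.length_pySetD, ih1], by simp [PySem.List.length_pySetD, ih2], ?_⟩
      intro j hj0 hjn
      obtain ⟨ihd, ihn⟩ := ih3 j hj0 hjn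
      have hlend : ∀ (l : List Int) (i : Int) (x : Int), (PySem.List.pySetD l i x).length = l.length :=
        fun l i x => PySem.List.length_pySetD l i x
      constructor
      · rw [pv_getD_setD _ v j _ 0 hv0 (by rw [hlend, ih1]; omega) hj0 (by rw [hlend, ih1]; omega),
          pv_getD_setD _ u j _ 0 hu0 (by rw [ih1]; omega) hj0 (by rw [ih1]; omega),
          pv_getD_setD _ u v _ 0 hu0 (by rw [ih1]; omega) hv0 (by rw [ih1]; omega)]
        rw [List.map_append, List.sum_append]
        simp only [List.map_cons, List.map_nil, List.sum_cons, List.sum_nil, add_zero]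
        show _ = _ + pvCDeg j [u, v]
        simp only [pvCDeg]
        by_cases hjv : j = v
        · subst hjv
          rw [if_pos rfl, if_neg (by omega : ¬ j = u), if_neg (by omega : ¬ u = j),
            if_pos rfl, ihd]
          ring
        · rw [if_neg hjv, if_neg (by omega : ¬ v = j)]
          by_cases hju : j = u
          · subst hju
            rw [if_pos rfl, if_pos rfl, ihd]
            ring
          · rw [if_neg hju, if_neg (by omega : ¬ u = j), ihd]
            ring
      · rw [pv_getD_setD _ v j _ 0 hv0 (by rw [hlend, ih2]; omega) hj0 (by rw [hlend, ih2]; omega),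
          pv_getD_setD _ u j _ 0 hu0 (by rw [ih2]; omega) hj0 (by rw [ih2]; omega),
          pv_getD_setD _ u v _ 0 hu0 (by rw [ih2]; omega) hv0 (by rw [ih2]; omega)]
        rw [List.map_append, List.sum_append]
        simp only [List.map_cons, List.map_nil, List.sum_cons, List.sum_nil, add_zero]
        show _ = _ + pvCNs j [u, v]
        simp only [pvCNs]
        by_cases hjv : j = v
        · subst hjv
          rw [if_pos rfl, if_neg (by omega : ¬ j = u), if_neg (by omega : ¬ u = j),
            if_pos rfl, ihn]
          ring
        · rw [if_neg hjv, if_neg (by omega : ¬ v = j)]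
          by_cases hju : j = u
          · subst hju
            rw [if_pos rfl, if_pos rfl, ihn]
            ring
          · rw [if_neg hju, if_neg (by omega : ¬ u = j), ihn]
            ring

theorem pv_cdeg_norm (j u v : Int) :
    pvCDeg j [u, v] = (if (pvNorm [u, v]).1 = j then 1 else 0) + (if (pvNorm [u, v]).2 = j then 1 else 0) := by
  simp only [pvCDeg, pvNorm]
  rcases le_total u v with h | h <;>
    simp [min_eq_left, min_eq_right, max_eq_left, max_eq_right, h] <;> split_ifs <;> omega

theorem pv_cns_norm (j u v : Int) :
    pvCNs j [u, v] = (if (pvNorm [u, v]).1 = j then (pvNorm [u, v]).2 else 0)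
      + (if (pvNorm [u, v]).2 = j then (pvNorm [u, v]).1 else 0) := by
  simp only [pvCNs, pvNorm]
  rcases le_total u v with h | h <;>
    simp [min_eq_left, min_eq_right, max_eq_left, max_eq_right, h] <;> split_ifs <;> omega

theorem pv_sum_over_edges (n : Nat) (edges : List (List Int)) (parents ord : List Int)
    (good : pvGood n edges parents ord)
    (hE : ∀ e ∈ edges, pvEdgeOK (n : Int) e = true)
    (hND : (edges.map pvNorm).Nodup) (hlen : edges.length + 1 = n) (g : Int × Int → Int) :
    ((edges.map pvNorm).map g).sum
      = (((ord.filter (· ≠ 0)).map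
          (fun v => (min (pvPar parents v) v, max (pvPar parents v) v))).map g).sum :=
  List.Perm.sum_eq (List.Perm.map g (pv_cover n edges parents ord good hE hND hlen))

theorem pv_deg_ns_val (n : Nat) (edges : List (List Int)) (parents ord : List Int)
    (good : pvGood n edges parents ord)
    (hE : ∀ e ∈ edges, pvEdgeOK (n : Int) e = true)
    (hND : (edges.map pvNorm).Nodup) (hlen : edges.length + 1 = n)
    (j : Int) (hj0 : 0 ≤ j) (hjn : j < n) :
    (edges.map (pvCDeg j)).sum = (if j = 0 then 0 else 1) + ((pvChl parents ord j).length : Int) ∧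
    (edges.map (pvCNs j)).sum
      = (if j = 0 then 0 else pvPar parents j) + (pvChl parents ord j).sum := by
  have hshape : ∀ e ∈ edges, ∃ u v : Int, e = [u, v] := by
    intro e he
    have := hE e he
    match e with
    | [u, v] => exact ⟨u, v, rfl⟩
    | [] => simp [pvEdgeOK] at this
    | [u] => simp [pvEdgeOK] at this
    | u :: v :: w :: r => simp [pvEdgeOK] at this
  have hjchl : (j ∈ ord.filter (· ≠ 0)) ↔ j ≠ 0 := by
    constructor
    · intro h; simpa using (List.mem_filter.1 h).2
    · intro h
      exact List.mem_filter.2 ⟨(good.mem j).2 ⟨hj0, hjn⟩, by simpa using h⟩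
  have hndchl : (ord.filter (· ≠ 0)).Nodup := good.nodup.filter _
  have hchleq : (ord.filter (· ≠ 0)).filter (fun v => decide (pvPar parents v = j))
      = pvChl parents ord j := by
    rw [List.filter_filter]
    unfold pvChl
    apply List.filter_congr
    intro x _
    by_cases h1 : x = 0 <;> by_cases h2 : pvPar parents x = j <;> simp [h1, h2]
  constructor
  · have h1 : edges.map (pvCDeg j) = (edges.map pvNorm).map
        (fun p => (if p.1 = j then 1 else 0) + (if p.2 = j then (1:Int) else 0)) := by
      rw [List.map_map]
      apply List.map_congr_left
      intro e he
      obtain ⟨u, v, rfl⟩ := hshape e he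
      exact pv_cdeg_norm j u v
    rw [h1, pv_sum_over_edges n edges parents ord good hE hND hlen _, List.map_map]
    have h2 : ((ord.filter (· ≠ 0)).map
        ((fun p : Int × Int => (if p.1 = j then 1 else 0) + (if p.2 = j then (1:Int) else 0)) ∘
          (fun v => (min (pvPar parents v) v, max (pvPar parents v) v)))) =
        (ord.filter (· ≠ 0)).map
          (fun v => (if pvPar parents v = j then 1 else 0) + (if v = j then (1:Int) else 0)) := by
      apply List.map_congr_left
      intro v _
      simp only [Function.comp_apply]
      rcases le_total (pvPar parents v) v with h | h <;>
        simp [min_eq_left, min_eq_right, max_eq_left, max_eq_right, h] <;> split_ifs <;> omega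
    rw [h2, PySem.List.sum_map_add_int,
      pv_sum_ite_filter (ord.filter (· ≠ 0)) (fun v => pvPar parents v = j) (fun _ => 1),
      hchleq, pv_sum_ite_mem _ hndchl j (fun _ => 1), PySem.List.sum_map_const_int]
    by_cases hj : j = 0
    · rw [if_neg (fun h => (hjchl.1 h) hj), if_pos hj]
      ring
    · rw [if_pos (hjchl.2 hj), if_neg hj]
      ring
  · have h1 : edges.map (pvCNs j) = (edges.map pvNorm).map
        (fun p => (if p.1 = j then p.2 else 0) + (if p.2 = j then p.1 else 0)) := by
      rw [List.map_map]
      apply List.map_congr_left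
      intro e he
      obtain ⟨u, v, rfl⟩ := hshape e he
      exact pv_cns_norm j u v
    rw [h1, pv_sum_over_edges n edges parents ord good hE hND hlen _, List.map_map]
    have h2 : ((ord.filter (· ≠ 0)).map
        ((fun p : Int × Int => (if p.1 = j then p.2 else 0) + (if p.2 = j then p.1 else 0)) ∘
          (fun v => (min (pvPar parents v) v, max (pvPar parents v) v)))) =
        (ord.filter (· ≠ 0)).map
          (fun v => (if pvPar parents v = j then v else 0) + (if v = j then pvPar parents v else 0)) := by
      apply List.map_congr_left
      intro v _
      simp only [Function.comp_apply]
      rcases le_total (pvPar parents v) v with h | h <;>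
        simp [min_eq_left, min_eq_right, max_eq_left, max_eq_right, h] <;> split_ifs <;> omega
    rw [h2, PySem.List.sum_map_add_int,
      pv_sum_ite_filter (ord.filter (· ≠ 0)) (fun v => pvPar parents v = j) (fun v => v),
      hchleq, pv_sum_ite_mem _ hndchl j (fun v => pvPar parents v), List.map_id']
    by_cases hj : j = 0
    · rw [if_neg (fun h => (hjchl.1 h) hj), if_pos hj]
      ring
    · rw [if_pos (hjchl.2 hj), if_neg hj]
      ring


-- == B side: the pruning loop invariant ==

structure pvPInv (n : Nat) (a0 parents ord : List Int) (R : Finset Int)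
    (deg ns aArr : List Int) (total : Int) (pending : List Int) : Prop where
  dlen : deg.length = n
  nlen : ns.length = n
  alen : aArr.length = n
  Rsub : ∀ v ∈ R, v ∈ ord ∧ v ≠ 0
  Rcl : ∀ v ∈ R, ∀ c ∈ pvChl parents ord v, c ∈ R
  deg_eq : ∀ j : Int, 0 ≤ j → j < n → j ∉ R →
    PySem.List.pyGetD deg j 0
      = (if j = 0 then 0 else 1) + (((pvChl parents ord j).filter (fun c => decide (c ∉ R))).length : Int)
  ns_eq : ∀ j : Int, 0 ≤ j → j < n → j ∉ R →
    PySem.List.pyGetD ns j 0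
      = (if j = 0 then 0 else pvPar parents j) + ((pvChl parents ord j).filter (fun c => decide (c ∉ R))).sum
  a_eq : ∀ j : Int, 0 ≤ j → j < n → j ∉ R →
    PySem.List.pyGetD aArr j 0
      = PySem.List.pyGetD a0 j 0
        + (((pvChl parents ord j).filter (fun c => decide (c ∈ R))).map (pvS a0 parents ord)).sum
  tot : total = R.sum (fun v => |pvS a0 parents ord v|)
  pnd : pending.Nodup ∧ ∀ v ∈ pending, v ∈ ord ∧ v ≠ 0 ∧ v ∉ R ∧ ∀ c ∈ pvChl parents ord v, c ∈ R
  comp : ∀ v ∈ ord, v ≠ 0 → v ∉ R → (∀ c ∈ pvChl parents ord v, c ∈ R) → v ∈ pending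

theorem pv_filter_not_insert_skip (l : List Int) (a : Int) (hal : a ∉ l) (R : Finset Int) :
    l.filter (fun c => decide (c ∉ insert a R)) = l.filter (fun c => decide (c ∉ R)) := by
  apply List.filter_congr
  intro x hx
  have hxa : x ≠ a := fun h => hal (h ▸ hx)
  simp [Finset.mem_insert, hxa]

theorem pv_filter_in_insert_skip (l : List Int) (a : Int) (hal : a ∉ l) (R : Finset Int) :
    l.filter (fun c => decide (c ∈ insert a R)) = l.filter (fun c => decide (c ∈ R)) := by
  apply List.filter_congr
  intro x hx
  have hxa : x ≠ a := fun h => hal (h ▸ hx)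
  simp [Finset.mem_insert, hxa]

theorem pv_filter_not_insert_map_sum (l : List Int) (hnd : l.Nodup) (a : Int) (ha : a ∈ l)
    (R : Finset Int) (haR : a ∉ R) (f : Int → Int) :
    ((l.filter (fun c => decide (c ∉ insert a R))).map f).sum + f a
      = ((l.filter (fun c => decide (c ∉ R))).map f).sum := by
  induction l with
  | nil => cases ha
  | cons x t ih =>
    rcases List.nodup_cons.1 hnd with ⟨hxt, hndt⟩
    rw [List.filter_cons, List.filter_cons]
    rcases List.mem_cons.1 ha with rfl | hat
    · rw [show (decide (a ∉ insert a R)) = false by simp,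
        show (decide (a ∉ R)) = true by simpa using haR]
      simp only [Bool.false_eq_true, if_false, reduceIte, List.map_cons, List.sum_cons]
      rw [pv_filter_not_insert_skip t a hxt R]
      ring
    · have hxa : x ≠ a := fun h => hxt (h ▸ hat)
      rw [show (decide (x ∉ insert a R)) = (decide (x ∉ R)) by
        simp [Finset.mem_insert, hxa]]
      cases hxR : decide (x ∉ R)
      · simp only [Bool.false_eq_true, if_false, reduceIte]
        exact ih hndt hat
      · simp only [reduceIte, List.map_cons, List.sum_cons]
        rw [← ih hndt hat]
        ring

theorem pv_filter_in_insert_map_sum (l : List Int) (hnd : l.Nodup) (a : Int) (ha : a ∈ l)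
    (R : Finset Int) (haR : a ∉ R) (f : Int → Int) :
    ((l.filter (fun c => decide (c ∈ insert a R))).map f).sum
      = ((l.filter (fun c => decide (c ∈ R))).map f).sum + f a := by
  induction l with
  | nil => cases ha
  | cons x t ih =>
    rcases List.nodup_cons.1 hnd with ⟨hxt, hndt⟩
    rw [List.filter_cons, List.filter_cons]
    rcases List.mem_cons.1 ha with rfl | hat
    · rw [show (decide (a ∈ insert a R)) = true by simp,
        show (decide (a ∈ R)) = false by simpa using haR]
      simp only [Bool.false_eq_true, if_false, reduceIte, List.map_cons, List.sum_cons]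
      rw [pv_filter_in_insert_skip t a hxt R]
      ring
    · have hxa : x ≠ a := fun h => hxt (h ▸ hat)
      rw [show (decide (x ∈ insert a R)) = (decide (x ∈ R)) by
        simp [Finset.mem_insert, hxa]]
      cases hxR : decide (x ∈ R)
      · simp only [Bool.false_eq_true, if_false, reduceIte]
        exact ih hndt hat
      · simp only [reduceIte, List.map_cons, List.sum_cons]
        rw [ih hndt hat]
        ring

theorem pv_filter_not_insert_len (l : List Int) (hnd : l.Nodup) (a : Int) (ha : a ∈ l)
    (R : Finset Int) (haR : a ∉ R) :
    ((l.filter (fun c => decide (c ∉ insert a R))).length : Int) + 1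
      = ((l.filter (fun c => decide (c ∉ R))).length : Int) := by
  have h := pv_filter_not_insert_map_sum l hnd a ha R haR (fun _ => 1)
  rw [PySem.List.sum_map_const_int, PySem.List.sum_map_const_int] at h
  omega

theorem pv_prune_spec (n : Nat) (edges : List (List Int)) (a0 parents ord : List Int)
    (good : pvGood n edges parents ord)
    (hE : ∀ e ∈ edges, pvEdgeOK (n : Int) e = true)
    (hND : (edges.map pvNorm).Nodup) (hlen : edges.length + 1 = n) :
    ∀ (fuel : Nat) (R : Finset Int) (deg ns aArr : List Int) (total : Int) (pending : List Int),
      pvPInv n a0 parents ord R deg ns aArr total pending → n + 1 ≤ fuel + R.card →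
      pvPrune fuel deg ns aArr total pending
        = ((ord.filter (· ≠ 0)).map (fun v => |pvS a0 parents ord v|)).sum := by
  have hn1 : 0 < n := by
    have h0 : (0:Int) ∈ ord := List.mem_of_mem_head? (by rw [good.head]; rfl)
    have := (good.mem 0).1 h0
    omega
  have hchll := pv_chl_length n edges parents ord good hn1
  have hchlnd : (ord.filter (· ≠ 0)).Nodup := good.nodup.filter _
  have hRle : ∀ R : Finset Int, (∀ v ∈ R, v ∈ ord ∧ v ≠ 0) → R.card + 1 ≤ n := by
    intro R hR
    have hsub : R ⊆ (ord.filter (· ≠ 0)).toFinset := by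
      intro v hv
      obtain ⟨h1, h2⟩ := hR v hv
      simp only [List.mem_toFinset, List.mem_filter]
      exact ⟨h1, by simpa using h2⟩
    have := Finset.card_le_card hsub
    rw [List.toFinset_card_of_nodup hchlnd] at this
    omega
  intro fuel
  induction fuel with
  | zero =>
    intro R deg ns aArr total pending hinv hfuel
    have := hRle R hinv.Rsub
    omega
  | succ fuel ih =>
    intro R deg ns aArr total pending hinv hfuel
    match pending with
    | [] =>
      show total = _
      -- every non-root node is already pruned
      have hall : ∀ (m i : Nat) (v : Int), ord[i]? = some v → ord.length - i ≤ m → v ≠ 0 →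
          v ∈ R := by
        intro m
        induction m with
        | zero =>
          intro i v hi hm
          have := (List.getElem?_eq_some_iff.1 hi).1
          omega
        | succ m ihm =>
          intro i v hi hm hv0
          have hvmem : v ∈ ord := List.mem_of_getElem? hi
          by_contra hvR
          have hchR : ∀ c ∈ pvChl parents ord v, c ∈ R := by
            intro c hc
            obtain ⟨j, hij, hj⟩ := pv_chl_before n edges parents ord good i v hi c hc
            obtain ⟨hc1, hc2, hc3⟩ := (pv_chl_mem parents ord c v).1 hc
            exact ihm j c hj (by
              have := (List.getElem?_eq_some_iff.1 hj).1
              omega) hc2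
          exact (List.not_mem_nil (a := v)) (hinv.comp v hvmem hv0 hvR hchR)
      have hReq : R = (ord.filter (· ≠ 0)).toFinset := by
        apply Finset.Subset.antisymm
        · intro v hv
          obtain ⟨h1, h2⟩ := hinv.Rsub v hv
          simp only [List.mem_toFinset, List.mem_filter]
          exact ⟨h1, by simpa using h2⟩
        · intro v hv
          simp only [List.mem_toFinset, List.mem_filter, decide_eq_true_eq] at hv
          obtain ⟨i, hiL, hieq⟩ := List.mem_iff_getElem.1 hv.1
          exact hall ord.length i v (List.getElem?_eq_some_iff.2 ⟨hiL, hieq⟩) (by omega) hv.2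
      rw [hinv.tot, hReq, List.sum_toFinset _ hchlnd]
    | leaf :: rest =>
      obtain ⟨hpndnd, hpnd⟩ := hinv.pnd
      obtain ⟨hlford, hlf0, hlfR, hlfch⟩ := hpnd leaf (by simp)
      have hlfrng := (good.mem leaf).1 hlford
      obtain ⟨hadjlf, hbeflf⟩ := good.par leaf hlford hlf0
      set p := pvPar parents leaf with hpdef
      obtain ⟨hp0, hpn, _, _, _⟩ := pv_adj_bounds n edges hE p leaf hadjlf
      have hpord : p ∈ ord := (pv_before_mem ord p leaf hbeflf).1
      have hplf : p ≠ leaf := pv_before_ne ord good.nodup p leaf hbeflf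
      have hpR : p ∉ R := by
        intro hpR
        exact hlfR (hinv.Rcl p hpR leaf ((pv_chl_mem parents ord leaf p).2 ⟨hlford, hlf0, rfl⟩))
      have hlfchl : leaf ∈ pvChl parents ord p :=
        (pv_chl_mem parents ord leaf p).2 ⟨hlford, hlf0, rfl⟩
      have hchlnodup : ∀ x : Int, (pvChl parents ord x).Nodup := fun x => good.nodup.filter _
      -- the stored neighbour sum of a ready leaf is exactly its parent
      have hnsleaf : PySem.List.pyGetD ns leaf 0 = p := by
        rw [hinv.ns_eq leaf hlfrng.1 hlfrng.2 hlfR]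
        have : (pvChl parents ord leaf).filter (fun c => decide (c ∉ R)) = [] := by
          rw [List.filter_eq_nil_iff]
          intro c hc
          simpa using hlfch c hc
        rw [this, if_neg hlf0]
        simpa using hpdef.symm
      -- its accumulated value is exactly its subtree sum
      have haleaf : PySem.List.pyGetD aArr leaf 0 = pvS a0 parents ord leaf := by
        rw [hinv.a_eq leaf hlfrng.1 hlfrng.2 hlfR]
        have : (pvChl parents ord leaf).filter (fun c => decide (c ∈ R)) = pvChl parents ord leaf := by
          rw [List.filter_eq_self]
          intro c hc
          simpa using hlfch c hc
        rw [this, ← pv_s_rec n edges a0 parents ord good leaf hlford]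
      show pvPrune fuel _ _ _ _ _ = _
      rw [hnsleaf]
      have halen := hinv.alen
      have hgetlf : PySem.List.pyGetD (PySem.List.pySetD aArr p
          (PySem.List.pyGetD aArr p 0 + PySem.List.pyGetD aArr leaf 0)) leaf 0
            = pvS a0 parents ord leaf := by
        rw [pv_getD_setD aArr p leaf _ 0 hp0 (by rw [halen]; exact_mod_cast hpn)
          hlfrng.1 (by rw [halen]; exact_mod_cast hlfrng.2), if_neg hplf.symm, haleaf]
      have hdeglf : PySem.List.pyGetD (PySem.List.pySetD deg p
          (PySem.List.pyGetD deg p 0 - 1)) p 0 = PySem.List.pyGetD deg p 0 - 1 := by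
        rw [pv_getD_setD deg p p _ 0 hp0 (by rw [hinv.dlen]; exact_mod_cast hpn)
          hp0 (by rw [hinv.dlen]; exact_mod_cast hpn), if_pos rfl]
      -- count of unpruned children of p drops by one
      have hcntp := pv_filter_not_insert_len (pvChl parents ord p) (hchlnodup p) leaf hlfchl R hlfR
      have hdegval : PySem.List.pyGetD deg p 0
          = (if p = 0 then 0 else 1) +
            (((pvChl parents ord p).filter (fun c => decide (c ∉ R))).length : Int) :=
        hinv.deg_eq p hp0 hpn hpR
      -- the new invariant, for R ∪ {leaf}
      have hinv' : pvPInv n a0 parents ord (insert leaf R)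
          (PySem.List.pySetD deg p (PySem.List.pyGetD deg p 0 - 1))
          (PySem.List.pySetD ns p (PySem.List.pyGetD ns p 0 - leaf))
          (PySem.List.pySetD aArr p (PySem.List.pyGetD aArr p 0 + PySem.List.pyGetD aArr leaf 0))
          (total + |pvS a0 parents ord leaf|)
          (if (PySem.List.pyGetD (PySem.List.pySetD deg p (PySem.List.pyGetD deg p 0 - 1)) p 0
                == 1 && p != 0) = true
           then rest ++ [p] else rest) := by
        constructor
        · rw [PySem.List.length_pySetD]; exact hinv.dlen
        · rw [PySem.List.length_pySetD]; exact hinv.nlen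
        · rw [PySem.List.length_pySetD]; exact hinv.alen
        · intro v hv
          rcases Finset.mem_insert.1 hv with rfl | hv
          · exact ⟨hlford, hlf0⟩
          · exact hinv.Rsub v hv
        · intro v hv c hc
          rcases Finset.mem_insert.1 hv with rfl | hv
          · exact Finset.mem_insert_of_mem (hlfch c hc)
          · exact Finset.mem_insert_of_mem (hinv.Rcl v hv c hc)
        · -- degrees
          intro j hj0 hjn hjR
          have hjR' : j ∉ R := fun h => hjR (Finset.mem_insert_of_mem h)
          have hjlf : j ≠ leaf := fun h => hjR (h ▸ Finset.mem_insert_self leaf R)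
          rw [pv_getD_setD deg p j _ 0 hp0 (by rw [hinv.dlen]; exact_mod_cast hpn)
            hj0 (by rw [hinv.dlen]; exact_mod_cast hjn)]
          by_cases hjp : j = p
          · subst hjp
            rw [if_pos rfl, hdegval]
            omega
          · rw [if_neg hjp, hinv.deg_eq j hj0 hjn hjR']
            have hlfnot : leaf ∉ pvChl parents ord j := by
              intro hmem
              obtain ⟨_, _, hpar⟩ := (pv_chl_mem parents ord leaf j).1 hmem
              exact hjp (hpdef.trans hpar).symm
            rw [pv_filter_not_insert_skip _ leaf hlfnot R]
        · -- neighbour sums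
          intro j hj0 hjn hjR
          have hjR' : j ∉ R := fun h => hjR (Finset.mem_insert_of_mem h)
          rw [pv_getD_setD ns p j _ 0 hp0 (by rw [hinv.nlen]; exact_mod_cast hpn)
            hj0 (by rw [hinv.nlen]; exact_mod_cast hjn)]
          by_cases hjp : j = p
          · subst hjp
            rw [if_pos rfl, hinv.ns_eq p hj0 hjn hjR']
            have hsum := pv_filter_not_insert_map_sum (pvChl parents ord p) (hchlnodup p) leaf hlfchl
              R hlfR (fun v => v)
            rw [List.map_id', List.map_id'] at hsum
            rw [show ((pvChl parents ord p).filter (fun c => decide (c ∉ insert leaf R))).sum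
                = ((pvChl parents ord p).filter (fun c => decide (c ∉ R))).sum - leaf by
              rw [← hsum]; ring]
            ring
          · rw [if_neg hjp, hinv.ns_eq j hj0 hjn hjR']
            have hlfnot : leaf ∉ pvChl parents ord j := by
              intro hmem
              obtain ⟨_, _, hpar⟩ := (pv_chl_mem parents ord leaf j).1 hmem
              exact hjp (hpdef.trans hpar).symm
            rw [pv_filter_not_insert_skip _ leaf hlfnot R]
        · -- accumulated values
          intro j hj0 hjn hjR
          have hjR' : j ∉ R := fun h => hjR (Finset.mem_insert_of_mem h)
          rw [pv_getD_setD aArr p j _ 0 hp0 (by rw [halen]; exact_mod_cast hpn)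
            hj0 (by rw [halen]; exact_mod_cast hjn)]
          by_cases hjp : j = p
          · subst hjp
            rw [if_pos rfl, hinv.a_eq p hj0 hjn hjR', haleaf,
              pv_filter_in_insert_map_sum (pvChl parents ord p) (hchlnodup p) leaf hlfchl
                R hlfR (pvS a0 parents ord)]
            ring
          · rw [if_neg hjp, hinv.a_eq j hj0 hjn hjR']
            have hlfnot : leaf ∉ pvChl parents ord j := by
              intro hmem
              obtain ⟨_, _, hpar⟩ := (pv_chl_mem parents ord leaf j).1 hmem
              exact hjp (hpdef.trans hpar).symm
            rw [pv_filter_in_insert_skip _ leaf hlfnot R]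
        · rw [Finset.sum_insert hlfR, hinv.tot]
          ring
        · -- the pending list
          have hrestnd : rest.Nodup := (List.nodup_cons.1 hpndnd).2
          have hlfrest : leaf ∉ rest := (List.nodup_cons.1 hpndnd).1
          have hrest : ∀ v ∈ rest, v ∈ ord ∧ v ≠ 0 ∧ v ∉ insert leaf R ∧
              ∀ c ∈ pvChl parents ord v, c ∈ insert leaf R := by
            intro v hv
            obtain ⟨h1, h2, h3, h4⟩ := hpnd v (by simp [hv])
            refine ⟨h1, h2, ?_, fun c hc => Finset.mem_insert_of_mem (h4 c hc)⟩
            intro hmem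
            rcases Finset.mem_insert.1 hmem with rfl | hmem
            · exact hlfrest hv
            · exact h3 hmem
          split_ifs with hcond
          · -- p becomes ready and is queued
            simp only [Bool.and_eq_true, beq_iff_eq, bne_iff_ne] at hcond
            obtain ⟨hdeg1, hpne0⟩ := hcond
            rw [hdeglf, hdegval, if_neg hpne0] at hdeg1
            have hcnt0 : (((pvChl parents ord p).filter
                (fun c => decide (c ∉ insert leaf R))).length : Int) = 0 := by omega
            have hchp : ∀ c ∈ pvChl parents ord p, c ∈ insert leaf R := by
              intro c hc
              by_contra hcR
              have : c ∈ (pvChl parents ord p).filter (fun c => decide (c ∉ insert leaf R)) :=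
                List.mem_filter.2 ⟨hc, by simpa using hcR⟩
              have := List.length_pos_of_mem this
              omega
            have hpnotrest : p ∉ rest := by
              intro hmem
              obtain ⟨_, _, _, h4⟩ := hpnd p (by simp [hmem])
              exact hlfR (h4 leaf hlfchl)
            constructor
            · rw [List.nodup_append]
              refine ⟨hrestnd, by simp, ?_⟩
              intro a ha b hb
              simp only [List.mem_singleton] at hb
              subst hb
              exact fun h => hpnotrest (h ▸ ha)
            · intro v hv
              rcases List.mem_append.1 hv with hv | hv
              · exact hrest v hv
              · simp only [List.mem_singleton] at hv
                subst hv
                refine ⟨hpord, hpne0, ?_, hchp⟩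
                intro hmem
                rcases Finset.mem_insert.1 hmem with h | h
                · exact hplf h
                · exact hpR h
          · exact ⟨hrestnd, hrest⟩
        · -- completeness of the pending list
          intro v hvord hv0 hvR hvch
          have hvlf : v ≠ leaf := fun h => hvR (h ▸ Finset.mem_insert_self leaf R)
          have hvR' : v ∉ R := fun h => hvR (Finset.mem_insert_of_mem h)
          by_cases hvp : v = p
          · subst hvp
            -- p is ready now; show the queue condition fired
            have hcnt0 : ((pvChl parents ord p).filter
                (fun c => decide (c ∉ insert leaf R))) = [] := by
              rw [List.filter_eq_nil_iff]
              intro c hc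
              exact fun h => (of_decide_eq_true h) (hvch c hc)
            have hdeg1 : PySem.List.pyGetD (PySem.List.pySetD deg p
                (PySem.List.pyGetD deg p 0 - 1)) p 0 = 1 := by
              rw [hdeglf, hdegval, if_neg hv0]
              have := hcntp
              rw [hcnt0] at this
              simp only [List.length_nil] at this
              omega
            rw [if_pos (by
              simp only [Bool.and_eq_true, beq_iff_eq, bne_iff_ne]
              exact ⟨hdeg1, hv0⟩)]
            simp
          · -- v was ready before this step already
            have hvchR : ∀ c ∈ pvChl parents ord v, c ∈ R := by
              intro c hc
              have := hvch c hc
              rcases Finset.mem_insert.1 this with rfl | h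
              · exfalso
                obtain ⟨_, _, hpar⟩ := (pv_chl_mem parents ord c v).1 hc
                exact hvp (hpdef.trans hpar).symm
              · exact h
            have := hinv.comp v hvord hv0 hvR' hvchR
            rcases List.mem_cons.1 this with rfl | hmem
            · exact absurd rfl hvlf
            · split_ifs
              · exact List.mem_append.2 (Or.inl hmem)
              · exact hmem
      have hcard : (insert leaf R).card = R.card + 1 := Finset.card_insert_of_notMem hlfR
      rw [hgetlf]
      exact ih (insert leaf R) _ _ _ _ _ hinv' (by omega)


-- == assembling both sides ==

theorem pv_main (a : List Int) (edges : List (List Int))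
    (hne : a ≠ []) (hE : ∀ e ∈ edges, pvEdgeOK (a.length : Int) e = true)
    (hND : (edges.map pvNorm).Nodup) (hlen : edges.length + 1 = a.length)
    (hconn : ((pvGrow edges)^[a.length] [(0:Int)]).length = a.length) :
    solution a edges = solution_alt a edges := by
  have hshape : ∀ e ∈ edges, ∃ u v : Int, e = [u, v] := by
    intro e he
    have := hE e he
    match e with
    | [u, v] => exact ⟨u, v, rfl⟩
    | [] => simp [pvEdgeOK] at this
    | [u] => simp [pvEdgeOK] at this
    | u :: v :: w :: r => simp [pvEdgeOK] at this
  set n := a.length with hn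
  have hn1 : 0 < n := by
    cases a with
    | nil => exact absurd rfl hne
    | cons x t => simp [hn]
  by_cases hs : a.sum ≠ 0
  · simp only [solution, solution_alt, if_pos hs]
  · simp only [solution, solution_alt, if_neg hs]
    -- ===== the BFS run of A =====
    have hcore0 : pvBCore n edges (PySem.List.pySetD (List.replicate n false) 0 true)
        [0] (List.replicate n (-1)) [] := by
      constructor
      · rw [PySem.List.length_pySetD, List.length_replicate]
      · rw [List.length_replicate]
      · simp
      · intro v hv
        simp only [List.nil_append, List.mem_singleton] at hv
        subst hv
        exact ⟨le_rfl, by exact_mod_cast hn1⟩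
      · intro j hj
        rw [PySem.List.pySetD_of_nonneg _ _ le_rfl]
        by_cases hj0 : j = 0
        · subst hj0
          rw [show ((0:Int).toNat) = 0 by rfl, List.getElem?_set_self (by simpa using hn1)]
          simp
        · rw [show ((0:Int).toNat) = 0 by rfl, List.getElem?_set_ne (Ne.symm hj0)]
          rw [List.getElem?_replicate_of_lt hj]
          simp only [List.nil_append, List.mem_singleton]
          constructor
          · intro h
            exact absurd (Option.some.inj h) Bool.false_ne_true
          · intro h
            exfalso
            exact hj0 (by exact_mod_cast h)
      · rfl
      · show PySem.List.pyGetD (List.replicate n (-1)) 0 (-1) = -1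
        rw [PySem.List.pyGetD_eq_getElem _ (-1) le_rfl (by simpa using hn1)]
        simp
      · intro v hv hv0
        simp only [List.nil_append, List.mem_singleton] at hv
        exact absurd hv hv0
    obtain ⟨hfinal, hmem0⟩ := pv_bfs_spec n edges hE hshape (n+1)
      (PySem.List.pySetD (List.replicate n false) 0 true) [0] (List.replicate n (-1)) []
      hcore0 (by intro u hu; cases hu) (by simp)
    have good : pvGood n edges
        (pvBfsLoop (pvGraphA edges) (n+1) (PySem.List.pySetD (List.replicate n false) 0 true)
          [0] (List.replicate n (-1)) []).1
        (pvBfsLoop (pvGraphA edges) (n+1) (PySem.List.pySetD (List.replicate n false) 0 true)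
          [0] (List.replicate n (-1)) []).2 :=
      pv_good_of_final n hn1 edges hE hconn _ _ hfinal (hmem0 0 (by simp))
    -- ===== A's value =====
    have hA := pv_phase2 n edges a
      (pvBfsLoop (pvGraphA edges) (n+1) (PySem.List.pySetD (List.replicate n false) 0 true)
        [0] (List.replicate n (-1)) []).1
      (pvBfsLoop (pvGraphA edges) (n+1) (PySem.List.pySetD (List.replicate n false) 0 true)
        [0] (List.replicate n (-1)) []).2
      good hE hn.symm 0 (by omega)
    rw [List.drop_zero] at hA
    rw [hA]
    -- ===== B's value =====
    obtain ⟨hdlen, hnlen, hval⟩ := pv_initDegNs_aux n edges hE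
    have hemp : ∀ (l : List Int), l.filter (fun c => decide (c ∉ (∅ : Finset Int))) = l := by
      intro l
      rw [List.filter_eq_self]
      intro c _
      simp
    have hemp2 : ∀ (l : List Int), l.filter (fun c => decide (c ∈ (∅ : Finset Int))) = [] := by
      intro l
      rw [List.filter_eq_nil_iff]
      intro c _
      simp
    have hinv0 : pvPInv n a
        (pvBfsLoop (pvGraphA edges) (n+1) (PySem.List.pySetD (List.replicate n false) 0 true)
          [0] (List.replicate n (-1)) []).1
        (pvBfsLoop (pvGraphA edges) (n+1) (PySem.List.pySetD (List.replicate n false) 0 true)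
          [0] (List.replicate n (-1)) []).2
        (∅ : Finset Int)
        (edges.foldl
          (fun (st : List Int × List Int) e =>
            match e with
            | [u, v] =>
              let deg := PySem.List.pySetD st.1 u (PySem.List.pyGetD st.1 u 0 + 1)
              let deg := PySem.List.pySetD deg v (PySem.List.pyGetD deg v 0 + 1)
              let ns := PySem.List.pySetD st.2 u (PySem.List.pyGetD st.2 u 0 + v)
              let ns := PySem.List.pySetD ns v (PySem.List.pyGetD ns v 0 + u)
              (deg, ns)
            | _ => st)
          (List.replicate n (0:Int), List.replicate n (0:Int))).1
        (edges.foldl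
          (fun (st : List Int × List Int) e =>
            match e with
            | [u, v] =>
              let deg := PySem.List.pySetD st.1 u (PySem.List.pyGetD st.1 u 0 + 1)
              let deg := PySem.List.pySetD deg v (PySem.List.pyGetD deg v 0 + 1)
              let ns := PySem.List.pySetD st.2 u (PySem.List.pyGetD st.2 u 0 + v)
              let ns := PySem.List.pySetD ns v (PySem.List.pyGetD ns v 0 + u)
              (deg, ns)
            | _ => st)
          (List.replicate n (0:Int), List.replicate n (0:Int))).2
        a 0
        ((PySem.List.pyRange 1 (n:Int) 1).filter
          (fun v => PySem.List.pyGetD (edges.foldl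
            (fun (st : List Int × List Int) e =>
              match e with
              | [u, v] =>
                let deg := PySem.List.pySetD st.1 u (PySem.List.pyGetD st.1 u 0 + 1)
                let deg := PySem.List.pySetD deg v (PySem.List.pyGetD deg v 0 + 1)
                let ns := PySem.List.pySetD st.2 u (PySem.List.pyGetD st.2 u 0 + v)
                let ns := PySem.List.pySetD ns v (PySem.List.pyGetD ns v 0 + u)
                (deg, ns)
              | _ => st)
            (List.replicate n (0:Int), List.replicate n (0:Int))).1 v 0 == 1)) := by
      constructor
      · exact hdlen
      · exact hnlen
      · exact hn.symm
      · intro v hv; cases hv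
      · intro v hv; cases hv
      · intro j hj0 hjn hjR
        rw [(hval j hj0 hjn).1, hemp]
        exact (pv_deg_ns_val n edges _ _ good hE hND hlen j hj0 hjn).1
      · intro j hj0 hjn hjR
        rw [(hval j hj0 hjn).2, hemp]
        exact (pv_deg_ns_val n edges _ _ good hE hND hlen j hj0 hjn).2
      · intro j hj0 hjn hjR
        rw [hemp2]
        simp
      · simp
      · constructor
        · exact (PySem.List.nodup_pyRange_one 1 n).filter _
        · intro v hv
          obtain ⟨hvr, hvc⟩ := List.mem_filter.1 hv
          have hvrng := (PySem.List.mem_pyRange_one).1 hvr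
          have hv0 : v ≠ 0 := by omega
          refine ⟨(good.mem v).2 ⟨by omega, by omega⟩, hv0, by simp, ?_⟩
          have hdegv := (pv_deg_ns_val n edges _ _ good hE hND hlen v (by omega) (by omega)).1
          rw [(hval v (by omega) (by omega)).1] at hvc
          have h1 : (edges.map (pvCDeg v)).sum = 1 := by
            simpa using hvc
          rw [hdegv, if_neg hv0] at h1
          have hlen0 : (pvChl
            (pvBfsLoop (pvGraphA edges) (n+1)
              (PySem.List.pySetD (List.replicate n false) 0 true)
              [0] (List.replicate n (-1)) []).1
            (pvBfsLoop (pvGraphA edges) (n+1)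
              (PySem.List.pySetD (List.replicate n false) 0 true)
              [0] (List.replicate n (-1)) []).2 v).length = 0 := by omega
          intro c hc
          exfalso
          rw [List.length_eq_zero_iff] at hlen0
          rw [hlen0] at hc
          cases hc
      · intro v hvord hv0 _ hvch
        have hvrng := (good.mem v).1 hvord
        have hchnil : pvChl
            (pvBfsLoop (pvGraphA edges) (n+1)
              (PySem.List.pySetD (List.replicate n false) 0 true)
              [0] (List.replicate n (-1)) []).1
            (pvBfsLoop (pvGraphA edges) (n+1)
              (PySem.List.pySetD (List.replicate n false) 0 true)
              [0] (List.replicate n (-1)) []).2 v = [] := by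
          rw [List.eq_nil_iff_forall_not_mem]
          intro c hc
          cases hvch c hc
        refine List.mem_filter.2 ⟨(PySem.List.mem_pyRange_one).2 ⟨by omega, by omega⟩, ?_⟩
        rw [(hval v (by omega) (by omega)).1,
          (pv_deg_ns_val n edges _ _ good hE hND hlen v (by omega) (by omega)).1,
          hchnil, if_neg hv0]
        simp
    have hB := pv_prune_spec n edges a
      (pvBfsLoop (pvGraphA edges) (n+1) (PySem.List.pySetD (List.replicate n false) 0 true)
        [0] (List.replicate n (-1)) []).1
      (pvBfsLoop (pvGraphA edges) (n+1) (PySem.List.pySetD (List.replicate n false) 0 true)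
        [0] (List.replicate n (-1)) []).2
      good hE hND hlen (n+1) (∅ : Finset Int) _ _ _ _ _ hinv0 (by simp)
    rw [hB]

-- ===== VERDICT (by name: the statement is the Claim_ definition above) =====
theorem solution_spec : Claim_equal_solution := by
  intro a edges _ hpre
  unfold Spec_solution
  rcases hpre with h | ⟨hne, hE, hND, hlen, hconn⟩
  · simp only [solution, solution_alt, if_pos h]
  · exact pv_main a edges hne hE hND hlen hconn
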